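-- pv_equiv track=rewrite | github.com/MdAbedin/binarysearch | 1011 Intersection of Two Maps.py | solve
-- ===== SOURCE A (Python) =====
-- def solve(a, b):
--     min_R = min(len(a),len(b))
--     min_C = min(len(a[0]),len(b[0]))
--     new = [[0]*(min_C) for i in range(min_R)]
--
--     for r in range(min_R):
--         for c in range(min_C):
--             if a[r][c] == 1 and b[r][c] == 1: new[r][c] = 1
--             elif (a[r][c] == 1) ^ (b[r][c] == 1): new[r][c] = 2
--
--     seen = set()
--
--     for r in range(len(new)):
--         for c in range(len(new[0])):
--             if new[r][c] == 2 and (r,c) not in seen: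
--                 new[r][c] = 0
--                 dfs = [[r,c]]
--                 seen.add((r,c))
--
--                 while dfs:
--                     cr,cc = dfs.pop()
--
--                     for nr,nc in [[cr+1,cc],[cr-1,cc],[cr,cc+1],[cr,cc-1]]:
--                         if 0<=nr<len(new) and 0<=nc<len(new[0]) and new[nr][nc] in [1,2] and (nr,nc) not in seen:
--                             new[nr][nc] = 0
--                             dfs.append([nr,nc])
--                             seen.add((nr,nc))
--
--     seen = set()
--     ans = 0
--
--
--     for r in range(len(new)):
--         for c in range(len(new[0])):
--             if new[r][c] == 1 and (r,c) not in seen: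
--                 ans += 1
--                 dfs = [[r,c]]
--
--                 while dfs:
--                     cr,cc = dfs.pop()
--
--                     for nr,nc in [[cr+1,cc],[cr-1,cc],[cr,cc+1],[cr,cc-1]]:
--                         if 0<=nr<len(new) and 0<=nc<len(new[0]) and new[nr][nc]==1 and (nr,nc) not in seen:
--                             dfs.append([nr,nc])
--                             seen.add((nr,nc))
--
--     return ans
-- ===== SOURCE B (Python) =====
-- def solve(a, b):
--     R = min(len(a), len(b))
--     C = min(len(a[0]), len(b[0]))
--     grid = [[(a[r][c] == 1) + (b[r][c] == 1) for c in range(C)] for r in range(R)]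
--
--     seen = set()
--     ans = 0
--     for r in range(R):
--         for c in range(C):
--             if grid[r][c] != 0 and (r, c) not in seen:
--                 pure = True
--                 seen.add((r, c))
--                 stack = [(r, c)]
--                 while stack:
--                     cr, cc = stack.pop()
--                     if grid[cr][cc] == 1:
--                         pure = False
--                     for nr, nc in ((cr - 1, cc), (cr + 1, cc), (cr, cc - 1), (cr, cc + 1)):
--                         if 0 <= nr < R and 0 <= nc < C and grid[nr][nc] != 0 and (nr, nc) not in seen:
--                             seen.add((nr, nc))
--                             stack.append((nr, nc))
--                 if pure:
--                     ans += 1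
--     return ans
-- ===== Notes on version B (the rewrite author's own statement) =====
-- stated objective: simpler
-- what changed: A's two grid passes (first flood-remove every region reachable from a XOR-cell by mutating the grid, then flood-count the remaining 1-regions) are replaced by one scan that flood-fills each nonzero component exactly once while tracking whether it contains a XOR-cell, counting it only if it does not; the grid is never mutated.
-- outside the precondition, e.g. on solve([], [[1]]): A raises IndexError, B raises IndexError; on solve([[1, 1], [1]], [[1, 1], [1, 1]]): A raises IndexError, B raises IndexError
import Mathlib
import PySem

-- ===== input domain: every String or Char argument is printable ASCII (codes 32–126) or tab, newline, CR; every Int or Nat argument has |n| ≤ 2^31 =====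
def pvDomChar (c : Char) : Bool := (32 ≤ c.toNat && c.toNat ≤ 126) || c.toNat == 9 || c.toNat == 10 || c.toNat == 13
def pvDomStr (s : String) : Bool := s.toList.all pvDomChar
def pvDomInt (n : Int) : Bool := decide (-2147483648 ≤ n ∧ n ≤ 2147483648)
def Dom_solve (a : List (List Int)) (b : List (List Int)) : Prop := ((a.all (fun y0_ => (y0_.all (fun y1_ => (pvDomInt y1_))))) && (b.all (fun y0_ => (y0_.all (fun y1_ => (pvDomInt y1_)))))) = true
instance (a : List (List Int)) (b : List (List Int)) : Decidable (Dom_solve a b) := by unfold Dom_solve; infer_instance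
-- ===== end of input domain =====

-- B replaces A's two-phase "flood-remove components touching a XOR-cell, then flood-count the rest"
-- by ONE scan that flood-fills each nonzero component once and counts it iff it contains no XOR-cell
-- (objective: simpler / alternative; equivalence of the RETURN value is what is proved).

-- ===== PORT A =====
-- g[r][c] read/write (only used under the Python code's own bounds guards)
def pvGet (g : List (List Int)) (r c : Int) : Int :=
  PySem.List.pyGetD (PySem.List.pyGetD g r []) c 0

def pvSet (g : List (List Int)) (r c : Int) (v : Int) : List (List Int) :=
  PySem.List.pySetD g r (PySem.List.pySetD (PySem.List.pyGetD g r []) c v)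

-- [[cr+1,cc],[cr-1,cc],[cr,cc+1],[cr,cc-1]]
def solveNbrs (p : Int × Int) : List (Int × Int) :=
  [(p.1 + 1, p.2), (p.1 - 1, p.2), (p.1, p.2 + 1), (p.1, p.2 - 1)]

-- one neighbour test of phase 1's DFS (zeroes the cell, pushes it, marks it seen)
def solveStep1 (st : List (List Int) × List (Int × Int) × PySem.Set (Int × Int))
    (q : Int × Int) : List (List Int) × List (Int × Int) × PySem.Set (Int × Int) :=
  if 0 ≤ q.1 ∧ q.1 < PySem.List.len st.1 ∧ 0 ≤ q.2 ∧
      q.2 < PySem.List.len (PySem.List.pyGetD st.1 0 []) ∧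
      (pvGet st.1 q.1 q.2 = 1 ∨ pvGet st.1 q.1 q.2 = 2) ∧ q ∉ st.2.2 then
    (pvSet st.1 q.1 q.2 0, q :: st.2.1, PySem.Set.add st.2.2 q)
  else st

-- phase 1's `while dfs:` loop (fuel makes the loop total; it is large enough, see μ below)
def solveDfs1 : Nat → List (List Int) × List (Int × Int) × PySem.Set (Int × Int) →
    List (List Int) × PySem.Set (Int × Int)
  | 0, st => (st.1, st.2.2)
  | fuel + 1, st =>
    match st.2.1 with
    | [] => (st.1, st.2.2)
    | p :: rest => solveDfs1 fuel ((solveNbrs p).foldl solveStep1 (st.1, rest, st.2.2))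

-- one neighbour test of phase 2's DFS (grid `new` is not mutated any more)
def solveStep2 (new : List (List Int)) (st : List (Int × Int) × PySem.Set (Int × Int))
    (q : Int × Int) : List (Int × Int) × PySem.Set (Int × Int) :=
  if 0 ≤ q.1 ∧ q.1 < PySem.List.len new ∧ 0 ≤ q.2 ∧
      q.2 < PySem.List.len (PySem.List.pyGetD new 0 []) ∧
      pvGet new q.1 q.2 = 1 ∧ q ∉ st.2 then
    (q :: st.1, PySem.Set.add st.2 q)
  else st

-- phase 2's `while dfs:` loop
def solveDfs2 (new : List (List Int)) : Nat → List (Int × Int) → PySem.Set (Int × Int) →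
    PySem.Set (Int × Int)
  | 0, _, seen => seen
  | fuel + 1, stack, seen =>
    match stack with
    | [] => seen
    | p :: rest =>
      let st := (solveNbrs p).foldl (solveStep2 new) (rest, seen)
      solveDfs2 new fuel st.1 st.2

def solve (a : List (List Int)) (b : List (List Int)) : Int :=
  let minR : Int := min (PySem.List.len a) (PySem.List.len b)
  let minC : Int := min (PySem.List.len (PySem.List.pyGetD a 0 []))
      (PySem.List.len (PySem.List.pyGetD b 0 []))
  -- new = [[0]*(min_C) for i in range(min_R)], then the double assignment loop
  let new0 := (PySem.List.pyRange 0 minR 1).map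
      (fun _ => (PySem.List.pyRange 0 minC 1).map (fun _ => (0 : Int)))
  let new := (PySem.List.pyRange 0 minR 1).foldl (fun g r =>
      (PySem.List.pyRange 0 minC 1).foldl (fun g c =>
        if pvGet a r c = 1 ∧ pvGet b r c = 1 then pvSet g r c 1
        else if Bool.xor (decide (pvGet a r c = 1)) (decide (pvGet b r c = 1)) then
          pvSet g r c 2
        else g) g) new0
  -- fuel for the while loops: strictly more than the measure 5*(cells - |seen|) + |stack| can ever be
  let fuel := 5 * (minR * minC).toNat + 8
  let nR := PySem.List.len new
  let nC := PySem.List.len (PySem.List.pyGetD new 0 [])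
  -- phase 1: remove every region reachable from a 2-cell
  let st1 := (PySem.List.pyRange 0 nR 1).foldl
      (fun (st : List (List Int) × PySem.Set (Int × Int)) r =>
        (PySem.List.pyRange 0 nC 1).foldl (fun st c =>
          if pvGet st.1 r c = 2 ∧ (r, c) ∉ st.2 then
            solveDfs1 fuel (pvSet st.1 r c 0, [(r, c)], PySem.Set.add st.2 (r, c))
          else st) st) (new, PySem.Set.empty)
  let new1 := st1.1
  -- phase 2: count the remaining 1-regions (Python re-binds seen = set(), ans = 0)
  let st2 := (PySem.List.pyRange 0 (PySem.List.len new1) 1).foldl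
      (fun (st : Int × PySem.Set (Int × Int)) r =>
        (PySem.List.pyRange 0 (PySem.List.len (PySem.List.pyGetD new1 0 [])) 1).foldl
          (fun st c =>
            if pvGet new1 r c = 1 ∧ (r, c) ∉ st.2 then
              (st.1 + 1, solveDfs2 new1 fuel [(r, c)] st.2)
            else st) st) ((0 : Int), PySem.Set.empty)
  st2.1

-- ===== PORT B =====
-- Source B's while loop: carries the purity flag; neighbours in reading order
def solveAltStep (grid : List (List Int)) (R C : Int)
    (s : List (Int × Int) × PySem.Set (Int × Int)) (q : Int × Int) :
    List (Int × Int) × PySem.Set (Int × Int) :=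
  if 0 ≤ q.1 ∧ q.1 < R ∧ 0 ≤ q.2 ∧ q.2 < C ∧ pvGet grid q.1 q.2 ≠ 0 ∧ q ∉ s.2 then
    (q :: s.1, PySem.Set.add s.2 q)
  else s

def solveAltDfs (grid : List (List Int)) (R C : Int) :
    Nat → Bool → List (Int × Int) → PySem.Set (Int × Int) → Bool × PySem.Set (Int × Int)
  | 0, pure, _, seen => (pure, seen)
  | fuel + 1, pure, stack, seen =>
    match stack with
    | [] => (pure, seen)
    | p :: rest =>
      let pure1 := if pvGet grid p.1 p.2 = 1 then false else pure
      let st := [(p.1 - 1, p.2), (p.1 + 1, p.2), (p.1, p.2 - 1), (p.1, p.2 + 1)].foldl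
        (solveAltStep grid R C) (rest, seen)
      solveAltDfs grid R C fuel pure1 st.1 st.2

def solve_alt (a : List (List Int)) (b : List (List Int)) : Int :=
  let R : Int := min (PySem.List.len a) (PySem.List.len b)
  let C : Int := min (PySem.List.len (PySem.List.pyGetD a 0 []))
      (PySem.List.len (PySem.List.pyGetD b 0 []))
  -- grid[r][c] = (a[r][c] == 1) + (b[r][c] == 1)
  let grid := (PySem.List.pyRange 0 R 1).map (fun r =>
      (PySem.List.pyRange 0 C 1).map (fun c =>
        (if pvGet a r c = 1 then (1 : Int) else 0) + (if pvGet b r c = 1 then 1 else 0)))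
  let fuel := 5 * (R * C).toNat + 8
  let st := (PySem.List.pyRange 0 R 1).foldl
      (fun (st : PySem.Set (Int × Int) × Int) r =>
        (PySem.List.pyRange 0 C 1).foldl (fun st c =>
          if pvGet grid r c ≠ 0 ∧ (r, c) ∉ st.1 then
            let res := solveAltDfs grid R C fuel true [(r, c)] (PySem.Set.add st.1 (r, c))
            if res.1 then (res.2, st.2 + 1) else (res.2, st.2)
          else st) st) (PySem.Set.empty, (0 : Int))
  st.2

-- ===== PRECONDITION & SPEC =====
-- Pre_ excludes exactly the inputs on which A raises IndexError: an empty `a` or `b`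
-- (A reads a[0]/b[0]) and ragged inputs whose first min_R rows are shorter than min_C.
def Pre_solve (a : List (List Int)) (b : List (List Int)) : Prop :=
  a ≠ [] ∧ b ≠ [] ∧
  (∀ row ∈ a.take (min a.length b.length),
    min (a.headD []).length (b.headD []).length ≤ row.length) ∧
  (∀ row ∈ b.take (min a.length b.length),
    min (a.headD []).length (b.headD []).length ≤ row.length)
instance (a : List (List Int)) (b : List (List Int)) : Decidable (Pre_solve a b) := by
  unfold Pre_solve; infer_instance

def pvWitness_solve : List (List Int) × List (List Int) :=
  ([[1, 0, 1], [2, 1, 0]], [[1, 1, 1], [0, 1, 5]])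

def Spec_solve (a : List (List Int)) (b : List (List Int)) (out : Int) : Prop := out = solve_alt a b
instance (a : List (List Int)) (b : List (List Int)) (out : Int) : Decidable (Spec_solve a b out) := by unfold Spec_solve; infer_instance

-- ===== CLAIM (what is proved, stated in full; the proofs are below) =====
def Claim_equal_solve : Prop := ∀ (a : List (List Int)) (b : List (List Int)), Dom_solve a b → Pre_solve a b → Spec_solve a b (solve a b)

-- ===== LEMMAS AND PROOFS =====

-- ---- abstract layer: grid graph over an abstract cell-value function ν ----
def pvAdj (x y : Int × Int) : Prop :=
  (x.1 = y.1 ∧ (x.2 = y.2 + 1 ∨ y.2 = x.2 + 1)) ∨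
  (x.2 = y.2 ∧ (x.1 = y.1 + 1 ∨ y.1 = x.1 + 1))

def pvIn (R C : Int) (x : Int × Int) : Prop := 0 ≤ x.1 ∧ x.1 < R ∧ 0 ≤ x.2 ∧ x.2 < C

-- the cell value A's grid-build computes (1 = both maps 1, 2 = exactly one, 0 = neither)
def pvVal (a b : List (List Int)) (x : Int × Int) : Int :=
  if pvGet a x.1 x.2 = 1 ∧ pvGet b x.1 x.2 = 1 then 1
  else if pvGet a x.1 x.2 = 1 ∨ pvGet b x.1 x.2 = 1 then 2
  else 0

-- nonzero in-grid cell
def pvP (R C : Int) (ν : Int × Int → Int) (x : Int × Int) : Prop := pvIn R C x ∧ ν x ≠ 0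

inductive pvReach (P : Int × Int → Prop) : Int × Int → Int × Int → Prop
  | refl (x) : P x → pvReach P x x
  | tail {x y z} : pvReach P x y → pvAdj y z → P z → pvReach P x z

-- cell in a region that phase 1 removes (reachable from a XOR-cell)
def pvRem (R C : Int) (ν : Int × Int → Int) (x : Int × Int) : Prop :=
  ∃ s, ν s = 2 ∧ pvReach (pvP R C ν) s x

-- survivor cell: nonzero and not removed
def pvP2 (R C : Int) (ν : Int × Int → Int) (x : Int × Int) : Prop :=
  pvP R C ν x ∧ ¬ pvRem R C ν x

-- a set closed under P-adjacency
def pvSat (P : Int × Int → Prop) (S : List (Int × Int)) : Prop :=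
  ∀ x ∈ S, ∀ y, pvAdj x y → P y → y ∈ S

-- component has a second cell
def pvBig (R C : Int) (ν : Int × Int → Int) (x : Int × Int) : Prop :=
  ∃ y, y ≠ x ∧ pvReach (pvP R C ν) x y

def pvShape (R C : Int) (g : List (List Int)) : Prop :=
  g.length = R.toNat ∧ ∀ row ∈ g, row.length = C.toNat

-- the phase-1 loop invariant: grid = original values with the seen cells zeroed
def pvRel1 (R C : Int) (ν : Int × Int → Int) (S : List (Int × Int)) (g : List (List Int)) : Prop :=
  pvShape R C g ∧ ∀ x, pvIn R C x → pvGet g x.1 x.2 = (if x ∈ S then 0 else ν x)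

def pvCells (R C : Int) : List (Int × Int) :=
  (PySem.List.pyRange 0 R 1).flatMap (fun r => (PySem.List.pyRange 0 C 1).map (fun c => (r, c)))

theorem pvAdj_symm {x y : Int × Int} (h : pvAdj x y) : pvAdj y x := by
  rcases h with ⟨h1, h2⟩ | ⟨h1, h2⟩
  · exact Or.inl ⟨h1.symm, h2.symm⟩
  · exact Or.inr ⟨h1.symm, h2.symm⟩

theorem pvAdj_ne {x y : Int × Int} (h : pvAdj x y) : x ≠ y := by
  rcases x with ⟨x1, x2⟩; rcases y with ⟨y1, y2⟩
  rintro ⟨⟩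
  rcases h with ⟨h1, h2⟩ | ⟨h1, h2⟩ <;> omega

theorem mem_solveNbrs {p q : Int × Int} : q ∈ solveNbrs p ↔ pvAdj p q := by
  rcases p with ⟨p1, p2⟩; rcases q with ⟨q1, q2⟩
  simp [solveNbrs, pvAdj, Prod.ext_iff]
  omega

theorem mem_nbrsB {p q : Int × Int} :
    q ∈ [(p.1 - 1, p.2), (p.1 + 1, p.2), (p.1, p.2 - 1), (p.1, p.2 + 1)] ↔ pvAdj p q := by
  rcases p with ⟨p1, p2⟩; rcases q with ⟨q1, q2⟩
  simp [pvAdj, Prod.ext_iff]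
  omega

theorem pvReach_src {P : Int × Int → Prop} {x y : Int × Int} (h : pvReach P x y) : P x := by
  induction h with
  | refl h => exact h
  | tail _ _ _ ih => exact ih

theorem pvReach_dest {P : Int × Int → Prop} {x y : Int × Int} (h : pvReach P x y) : P y := by
  induction h with
  | refl h => exact h
  | tail _ _ h _ => exact h

theorem pvReach_trans {P : Int × Int → Prop} {x y z : Int × Int}
    (h1 : pvReach P x y) (h2 : pvReach P y z) : pvReach P x z := by
  induction h2 with
  | refl _ => exact h1
  | tail _ hadj hP ih => exact pvReach.tail ih hadj hP

theorem pvReach_head {P : Int × Int → Prop} {x y z : Int × Int}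
    (hx : P x) (hadj : pvAdj x y) (h : pvReach P y z) : pvReach P x z :=
  pvReach_trans (pvReach.tail (pvReach.refl x hx) hadj (pvReach_src h)) h

theorem pvReach_symm {P : Int × Int → Prop} {x y : Int × Int}
    (h : pvReach P x y) : pvReach P y x := by
  induction h with
  | refl h => exact pvReach.refl _ h
  | tail hxy hadj hP ih => exact pvReach_head hP (pvAdj_symm hadj) ih

theorem pvReach_mono {P Q : Int × Int → Prop} (hPQ : ∀ z, P z → Q z) {x y : Int × Int}
    (h : pvReach P x y) : pvReach Q x y := by
  induction h with
  | refl h => exact pvReach.refl _ (hPQ _ h)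
  | tail _ hadj hP ih => exact pvReach.tail ih hadj (hPQ _ hP)

theorem pvSat_reach {P : Int × Int → Prop} {S : List (Int × Int)} (hS : pvSat P S)
    {x y : Int × Int} (hx : x ∈ S) (h : pvReach P x y) : y ∈ S := by
  induction h with
  | refl _ => exact hx
  | tail _ hadj hP ih => exact hS _ ih _ hadj hP

theorem pvSat_not_reach {P : Int × Int → Prop} {S : List (Int × Int)} (hS : pvSat P S)
    {x y : Int × Int} (hx : x ∉ S) (h : pvReach P x y) : y ∉ S := fun hy =>
  hx (pvSat_reach hS hy (pvReach_symm h))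

-- removedness spreads along components
theorem pvRem_of_reach {R C : Int} {ν : Int × Int → Int} {x y : Int × Int}
    (hx : pvRem R C ν x) (h : pvReach (pvP R C ν) x y) : pvRem R C ν y := by
  obtain ⟨s, hs2, hsx⟩ := hx
  exact ⟨s, hs2, pvReach_trans hsx h⟩

theorem pvP2_of_reach {R C : Int} {ν : Int × Int → Int} {x y : Int × Int}
    (hx : ¬ pvRem R C ν x) (h : pvReach (pvP R C ν) x y) : pvP2 R C ν y :=
  ⟨pvReach_dest h, fun hy => hx (pvRem_of_reach hy (pvReach_symm h))⟩

theorem pvReach_P2_of_pure {R C : Int} {ν : Int × Int → Int} {x y : Int × Int}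
    (hx : ¬ pvRem R C ν x) (h : pvReach (pvP R C ν) x y) :
    pvReach (pvP2 R C ν) x y := by
  induction h with
  | refl h => exact pvReach.refl _ ⟨h, hx⟩
  | tail hxy hadj hP ih =>
    exact pvReach.tail ih hadj (pvP2_of_reach hx (pvReach.tail hxy hadj hP))

theorem pvReach_of_P2 {R C : Int} {ν : Int × Int → Int} {x y : Int × Int}
    (h : pvReach (pvP2 R C ν) x y) : pvReach (pvP R C ν) x y :=
  pvReach_mono (fun _ hz => hz.1) h

theorem mem_pvCells {R C : Int} {x : Int × Int} : x ∈ pvCells R C ↔ pvIn R C x := by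
  rcases x with ⟨r, c⟩
  simp [pvCells, pvIn, PySem.List.mem_pyRange_one, Prod.ext_iff]
  tauto

theorem nodup_pvCells {R C : Int} : (pvCells R C).Nodup := by
  unfold pvCells
  rw [List.nodup_flatMap]
  constructor
  · intro r _
    exact (PySem.List.nodup_pyRange_one 0 C).map (fun c₁ c₂ h => by simpa using congrArg Prod.snd h)
  · apply (PySem.List.pairwise_lt_pyRange_one 0 R).imp
    intro r r' hlt
    simp only [Function.onFun]
    rw [List.disjoint_left]
    intro x hx hx'
    simp only [List.mem_map] at hx hx'
    obtain ⟨c, _, rfl⟩ := hx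
    obtain ⟨c', _, h⟩ := hx'
    have := congrArg Prod.fst h
    simp at this
    omega

theorem pvShape_set {R C : Int} {g : List (List Int)} {r c v : Int} (h : pvShape R C g)
    (hin : pvIn R C (r, c)) : pvShape R C (pvSet g r c v) := by
  obtain ⟨h1, h2⟩ := h
  replace hin : 0 ≤ r ∧ r < R ∧ 0 ≤ c ∧ c < C := hin
  obtain ⟨hr0, hrR, hc0, hcC⟩ := hin
  unfold pvSet
  rw [PySem.List.pySetD_of_nonneg _ _ hr0]
  refine ⟨by simpa using h1, ?_⟩
  intro row hrow
  rcases List.mem_or_eq_of_mem_set hrow with h | h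
  · exact h2 _ h
  · subst h
    rw [PySem.List.pySetD_of_nonneg _ _ hc0, List.length_set]
    exact h2 _ (PySem.List.pyGetD_mem _ _ ⟨by omega, by omega⟩)

theorem pvGet_set {R C : Int} {g : List (List Int)} {r c v : Int} (h : pvShape R C g)
    (hin : pvIn R C (r, c)) {r' c' : Int} (hin' : pvIn R C (r', c')) :
    pvGet (pvSet g r c v) r' c' = if (r', c') = (r, c) then v else pvGet g r' c' := by
  obtain ⟨h1, h2⟩ := h
  replace hin : 0 ≤ r ∧ r < R ∧ 0 ≤ c ∧ c < C := hin
  replace hin' : 0 ≤ r' ∧ r' < R ∧ 0 ≤ c' ∧ c' < C := hin'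
  obtain ⟨hr0, hrR, hc0, hcC⟩ := hin
  obtain ⟨hr0', hrR', hc0', hcC'⟩ := hin'
  have hrlen : r.toNat < g.length := by omega
  have hrlen' : r'.toNat < g.length := by omega
  have hrow : PySem.List.pyGetD g r [] = g[r.toNat] :=
    PySem.List.pyGetD_eq_getElem _ _ hr0 (by omega)
  have hrow' : PySem.List.pyGetD g r' [] = g[r'.toNat] :=
    PySem.List.pyGetD_eq_getElem _ _ hr0' (by omega)
  have hclen : c.toNat < (g[r.toNat]).length := by
    rw [h2 _ (List.getElem_mem hrlen)]; omega
  have hclen' : c'.toNat < (g[r'.toNat]).length := by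
    rw [h2 _ (List.getElem_mem hrlen')]; omega
  unfold pvSet pvGet
  rw [PySem.List.pySetD_of_nonneg _ _ hr0, hrow, PySem.List.pySetD_of_nonneg _ _ hc0]
  rw [PySem.List.pyGetD_eq_getElem _ _ hr0' (by rw [List.length_set]; omega)]
  rw [List.getElem_set]
  by_cases hrr : r' = r
  · subst hrr
    rw [if_pos rfl]
    rw [PySem.List.pyGetD_eq_getElem _ _ hc0' (by rw [List.length_set]; omega)]
    rw [List.getElem_set]
    by_cases hcc : c' = c
    · subst hcc; simp
    · have h1' : ¬ (c.toNat = c'.toNat) := by omega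
      have h2' : ¬ ((r', c') = (r', c)) := by simp [Prod.ext_iff]; omega
      simp only [if_neg h1', if_neg h2']
      rw [hrow', PySem.List.pyGetD_eq_getElem _ _ hc0' (by omega)]
  · have h1' : ¬ (r.toNat = r'.toNat) := by omega
    have h2' : ¬ ((r', c') = (r, c)) := by simp [Prod.ext_iff]; omega
    simp only [if_neg h1', if_neg h2']
    rw [PySem.List.pyGetD_eq_getElem _ _ hc0' (by omega)]
    rw [hrow', PySem.List.pyGetD_eq_getElem _ _ hc0' (by omega)]

theorem pvCard_bound {R C : Int} {l : List (Int × Int)} (hnd : l.Nodup)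
    (hin : ∀ x ∈ l, pvIn R C x) : l.length ≤ R.toNat * C.toNat := by
  have h1 : l.toFinset.card = l.length := List.toFinset_card_of_nodup hnd
  have h2 : l.toFinset ⊆ Finset.Ico 0 R ×ˢ Finset.Ico 0 C := by
    intro x hx
    simp only [List.mem_toFinset] at hx
    obtain ⟨a1, a2, a3, a4⟩ := hin x hx
    simp only [Finset.mem_product, Finset.mem_Ico]
    exact ⟨⟨a1, a2⟩, a3, a4⟩
  have h3 := Finset.card_le_card h2
  rw [Finset.card_product] at h3
  simp only [Int.card_Ico, Int.sub_zero] at h3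
  omega

theorem pvFoldl_nested {γ : Type} (rows cols : List Int) (f : γ → Int × Int → γ) (init : γ) :
    rows.foldl (fun g r => cols.foldl (fun g c => f g (r, c)) g) init
      = (rows.flatMap (fun r => cols.map (fun c => (r, c)))).foldl f init := by
  induction rows generalizing init with
  | nil => rfl
  | cons r rows ih => simp [List.flatMap_cons, List.foldl_append, ih, List.foldl_map]

def pvW (a b : List (List Int)) (g : List (List Int)) (p : Int × Int) : List (List Int) :=
  if pvGet a p.1 p.2 = 1 ∧ pvGet b p.1 p.2 = 1 then pvSet g p.1 p.2 1
  else if Bool.xor (decide (pvGet a p.1 p.2 = 1)) (decide (pvGet b p.1 p.2 = 1)) then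
    pvSet g p.1 p.2 2
  else g

theorem pvBuildA (a b : List (List Int)) (R C : Int) :
    ∀ (L : List (Int × Int)) (g : List (List Int)), pvShape R C g → (∀ x ∈ L, pvIn R C x) →
    (∀ x, pvIn R C x → pvVal a b x = 0 → pvGet g x.1 x.2 = 0) →
    pvShape R C (L.foldl (pvW a b) g) ∧
    (∀ x, pvIn R C x →
      pvGet (L.foldl (pvW a b) g) x.1 x.2 = if x ∈ L then pvVal a b x else pvGet g x.1 x.2) := by
  intro L
  induction L with
  | nil => intro g hsh _ _; exact ⟨hsh, fun x hx => by simp⟩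
  | cons p L ih =>
    intro g hsh hL hz
    have hp : pvIn R C p := hL p (List.mem_cons_self)
    have hp' : pvIn R C (p.1, p.2) := hp
    -- the one-step write
    have hsh1 : pvShape R C (pvW a b g p) := by
      unfold pvW; split_ifs <;> first | exact pvShape_set hsh hp' | exact hsh
    have hstep : ∀ x, pvIn R C x →
        pvGet (pvW a b g p) x.1 x.2 = if x = p then pvVal a b p else pvGet g x.1 x.2 := by
      intro x hx
      have hx' : pvIn R C (x.1, x.2) := hx
      have hres : (pvW a b g p = pvSet g p.1 p.2 (pvVal a b p) ∧ pvVal a b p ≠ 0) ∨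
          (pvW a b g p = g ∧ pvVal a b p = 0) := by
        by_cases ha : pvGet a p.1 p.2 = 1 <;> by_cases hb : pvGet b p.1 p.2 = 1 <;>
          simp [pvW, pvVal, ha, hb]
      rcases hres with ⟨he, hv⟩ | ⟨he, hv⟩
      · rw [he, pvGet_set hsh hp' hx']
      · rw [he]
        by_cases hxe : x = p
        · subst hxe; simp [hv, hz x hx hv]
        · simp [hxe]
    have hz1 : ∀ x, pvIn R C x → pvVal a b x = 0 → pvGet (pvW a b g p) x.1 x.2 = 0 := by
      intro x hx hv
      rw [hstep x hx]
      by_cases hxp : x = p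
      · subst hxp; simp [hv]
      · rw [if_neg hxp]; exact hz x hx hv
    obtain ⟨hsh2, hval2⟩ := ih (pvW a b g p) hsh1 (fun x hx => hL x (List.mem_cons_of_mem _ hx)) hz1
    refine ⟨by simpa using hsh2, ?_⟩
    intro x hx
    rw [List.foldl_cons, hval2 x hx, hstep x hx]
    by_cases hxL : x ∈ L
    · simp [hxL]
    · by_cases hxp : x = p
      · subst hxp; simp [hxL]
      · simp [hxL, hxp]

theorem pvShape_mapGrid {R C : Int} (f : Int → Int → Int) :
    pvShape R C ((PySem.List.pyRange 0 R 1).map (fun r => (PySem.List.pyRange 0 C 1).map (fun c => f r c))) := by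
  constructor
  · simp [PySem.List.length_pyRange_one]
  · intro row hrow
    simp only [List.mem_map] at hrow
    obtain ⟨r, _, rfl⟩ := hrow
    simp [PySem.List.length_pyRange_one]

theorem pvGet_mapGrid {R C : Int} (f : Int → Int → Int) {x : Int × Int} (hin : pvIn R C x) :
    pvGet ((PySem.List.pyRange 0 R 1).map (fun r => (PySem.List.pyRange 0 C 1).map (fun c => f r c))) x.1 x.2
      = f x.1 x.2 := by
  replace hin : 0 ≤ x.1 ∧ x.1 < R ∧ 0 ≤ x.2 ∧ x.2 < C := hin
  unfold pvGet
  rw [PySem.List.pyGetD_map_pyRange_of_nonneg _ _ _ _ hin.1 hin.2.1]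
  rw [PySem.List.pyGetD_map_pyRange_of_nonneg _ _ _ _ hin.2.2.1 hin.2.2.2]

-- value of B's grid: the (a==1)+(b==1) encoding swaps A's 1 and 2
theorem pvEncB (a b : List (List Int)) (r c : Int) :
    (if pvGet a r c = 1 then (1 : Int) else 0) + (if pvGet b r c = 1 then 1 else 0)
      = (if pvVal a b (r, c) = 1 then 2 else if pvVal a b (r, c) = 2 then 1 else 0) := by
  by_cases ha : pvGet a r c = 1 <;> by_cases hb : pvGet b r c = 1 <;> simp [pvVal, ha, hb]

-- the guard of solveStep1 under the phase-1 invariant is exactly "new nonzero in-grid cell"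
theorem pvStep1_guard (R C : Int) (ν : Int × Int → Int) (hR : 0 ≤ R) (hC : 0 ≤ C)
    (hv : ∀ x, ν x = 0 ∨ ν x = 1 ∨ ν x = 2)
    {g : List (List Int)} {seen : PySem.Set (Int × Int)}
    (hrel : pvRel1 R C ν seen g) (q : Int × Int) :
    (0 ≤ q.1 ∧ q.1 < PySem.List.len g ∧ 0 ≤ q.2 ∧
      q.2 < PySem.List.len (PySem.List.pyGetD g 0 []) ∧
      (pvGet g q.1 q.2 = 1 ∨ pvGet g q.1 q.2 = 2) ∧ q ∉ seen)
      ↔ (pvP R C ν q ∧ q ∉ seen) := by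
  obtain ⟨⟨hlen, hrows⟩, hval⟩ := hrel
  have hlen' : PySem.List.len g = (g.length : Int) := PySem.List.len_eq g
  constructor
  · rintro ⟨h1, h2, h3, h4, h5, h6⟩
    have hq1 : q.1 < R := by rw [hlen', hlen] at h2; omega
    have hg0 : g ≠ [] := by
      intro h; subst h; simp [PySem.List.len] at h2; omega
    have hrow0 : PySem.List.pyGetD g 0 [] = g.head hg0 := by
      rw [PySem.List.pyGetD_zero]
      cases g with
      | nil => simp at hg0
      | cons r t => rfl
    have hq2 : q.2 < C := by
      rw [hrow0, PySem.List.len_eq, hrows _ (List.head_mem hg0)] at h4; omega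
    have hin : pvIn R C q := ⟨h1, hq1, h3, hq2⟩
    refine ⟨⟨hin, ?_⟩, h6⟩
    rw [hval q hin, if_neg h6] at h5
    rcases h5 with h | h <;> omega
  · rintro ⟨⟨hin, hnz⟩, h6⟩
    obtain ⟨hq1, hq2, hq3, hq4⟩ := hin
    have hg0 : g ≠ [] := by
      intro h
      rw [h] at hlen; simp at hlen; omega
    have hrow0 : PySem.List.pyGetD g 0 [] = g.head hg0 := by
      rw [PySem.List.pyGetD_zero]
      cases g with
      | nil => simp at hg0
      | cons r t => rfl
    refine ⟨hq1, by rw [hlen', hlen]; omega, hq3, ?_, ?_, h6⟩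
    · rw [hrow0, PySem.List.len_eq, hrows _ (List.head_mem hg0)]; omega
    · rw [hval q ⟨hq1, hq2, hq3, hq4⟩, if_neg h6]
      rcases hv q with h | h | h <;> omega

theorem pvStep1_fold (R C : Int) (ν : Int × Int → Int) (hR : 0 ≤ R) (hC : 0 ≤ C)
    (hv : ∀ x, ν x = 0 ∨ ν x = 1 ∨ ν x = 2) :
    ∀ (ns : List (Int × Int)) (g : List (List Int)) (stack : List (Int × Int))
      (seen : PySem.Set (Int × Int)),
    pvRel1 R C ν seen g → seen.Nodup → (∀ x ∈ seen, pvP R C ν x) → (∀ x ∈ stack, x ∈ seen) →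
    ∀ g' stack' seen', ns.foldl solveStep1 (g, stack, seen) = (g', stack', seen') →
    pvRel1 R C ν seen' g' ∧ seen'.Nodup ∧ (∀ x ∈ seen', pvP R C ν x) ∧
    (∀ x ∈ stack', x ∈ seen') ∧ (∀ x ∈ seen, x ∈ seen') ∧
    (∀ x ∈ seen', x ∈ seen ∨ (x ∈ ns ∧ pvP R C ν x)) ∧
    (∀ q ∈ ns, pvP R C ν q → q ∈ seen') ∧
    (∀ x, x ∈ stack' ↔ x ∈ stack ∨ (x ∈ seen' ∧ x ∉ seen)) ∧
    seen'.length + stack.length = seen.length + stack'.length := by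
  intro ns
  induction ns with
  | nil =>
    intro g stack seen hrel hnd hsP hss g' stack' seen' heq
    obtain ⟨rfl, rfl, rfl⟩ : g = g' ∧ stack = stack' ∧ seen = seen' := by
      simpa [Prod.ext_iff] using heq
    refine ⟨hrel, hnd, hsP, hss, fun x hx => hx, fun x hx => Or.inl hx, by simp, ?_, by omega⟩
    intro x
    constructor
    · intro h; exact Or.inl h
    · rintro (h | ⟨h1, h2⟩)
      · exact h
      · exact absurd h1 h2
  | cons q ns ih =>
    intro g stack seen hrel hnd hsP hss g' stack' seen' heq
    rw [List.foldl_cons] at heq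
    by_cases hg : (0 ≤ q.1 ∧ q.1 < PySem.List.len g ∧ 0 ≤ q.2 ∧
        q.2 < PySem.List.len (PySem.List.pyGetD g 0 []) ∧
        (pvGet g q.1 q.2 = 1 ∨ pvGet g q.1 q.2 = 2) ∧ q ∉ seen)
    · -- the neighbour is pushed
      have hstep : solveStep1 (g, stack, seen) q
          = (pvSet g q.1 q.2 0, q :: stack, PySem.Set.add seen q) := by
        simp only [solveStep1]; rw [if_pos hg]
      obtain ⟨hqP, hqns⟩ := (pvStep1_guard R C ν hR hC hv hrel q).mp hg
      rw [hstep] at heq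
      have hq' : pvIn R C (q.1, q.2) := hqP.1
      have hrel1 : pvRel1 R C ν (PySem.Set.add seen q) (pvSet g q.1 q.2 0) := by
        refine ⟨pvShape_set hrel.1 hq', ?_⟩
        intro x hx
        rw [pvGet_set hrel.1 hq' (show pvIn R C (x.1, x.2) from hx)]
        by_cases hxq : x = q
        · subst hxq
          simp [PySem.Set.mem_add]
        · have : ¬ ((x.1, x.2) = (q.1, q.2)) := by
            intro h
            exact hxq (Prod.ext_iff.mpr ⟨congrArg Prod.fst h, congrArg Prod.snd h⟩)
          rw [if_neg this, hrel.2 x hx]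
          have : (x ∈ PySem.Set.add seen q) ↔ x ∈ seen := by
            rw [PySem.Set.mem_add]; simp [hxq]
          rw [if_congr this rfl rfl]
      have hnd1 : (PySem.Set.add seen q).Nodup := PySem.Set.nodup_add _ _ hnd
      have hsP1 : ∀ x ∈ PySem.Set.add seen q, pvP R C ν x := by
        intro x hx
        rcases (PySem.Set.mem_add _ _ _).mp hx with h | h
        · exact hsP x h
        · subst h; exact hqP
      have hss1 : ∀ x ∈ q :: stack, x ∈ PySem.Set.add seen q := by
        intro x hx
        rcases List.mem_cons.mp hx with h | h
        · subst h; rw [PySem.Set.mem_add]; exact Or.inr rfl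
        · rw [PySem.Set.mem_add]; exact Or.inl (hss x h)
      obtain ⟨c1, c2, c3, c4, c5, c6, c7, c8, c9⟩ :=
        ih _ _ _ hrel1 hnd1 hsP1 hss1 g' stack' seen' heq
      have hmem_add : ∀ x, x ∈ PySem.Set.add seen q ↔ (x ∈ seen ∨ x = q) :=
        fun x => PySem.Set.mem_add _ _ _
      have hlen_add : (PySem.Set.add seen q).length = seen.length + 1 := by
        rw [PySem.Set.add_of_not_mem hqns, List.length_append, List.length_singleton]
      refine ⟨c1, c2, c3, c4, ?_, ?_, ?_, ?_, by rw [hlen_add] at c9; simp only [List.length_cons] at c9; omega⟩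
      · intro x hx; exact c5 x ((hmem_add x).2 (Or.inl hx))
      · intro x hx
        rcases c6 x hx with h | ⟨h1, h2⟩
        · rcases (hmem_add x).mp h with h' | h'
          · exact Or.inl h'
          · subst h'; exact Or.inr ⟨List.mem_cons_self, hqP⟩
        · exact Or.inr ⟨List.mem_cons_of_mem _ h1, h2⟩
      · intro p hp hpP
        rcases List.mem_cons.mp hp with h | h
        · subst h; exact c5 p ((hmem_add p).mpr (Or.inr rfl))
        · exact c7 p h hpP
      · intro x
        rw [c8 x]
        constructor
        · rintro (h | ⟨h1, h2⟩)
          · rcases List.mem_cons.mp h with h' | h'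
            · refine Or.inr ?_
              rw [h']
              exact ⟨c5 q ((hmem_add q).2 (Or.inr rfl)), hqns⟩
            · exact Or.inl h'
          · refine Or.inr ⟨h1, ?_⟩
            intro hx
            exact h2 ((hmem_add x).2 (Or.inl hx))
        · rintro (h | ⟨h1, h2⟩)
          · exact Or.inl (List.mem_cons_of_mem _ h)
          · by_cases hxq : x = q
            · subst hxq; exact Or.inl List.mem_cons_self
            · refine Or.inr ⟨h1, ?_⟩
              intro hx
              rcases (hmem_add x).mp hx with h' | h'
              · exact h2 h'
              · exact hxq h'
    · -- nothing happens
      have hstep : solveStep1 (g, stack, seen) q = (g, stack, seen) := by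
        simp only [solveStep1]; rw [if_neg hg]
      rw [hstep] at heq
      obtain ⟨c1, c2, c3, c4, c5, c6, c7, c8, c9⟩ :=
        ih _ _ _ hrel hnd hsP hss g' stack' seen' heq
      refine ⟨c1, c2, c3, c4, c5, ?_, ?_, c8, c9⟩
      · intro x hx
        rcases c6 x hx with h | ⟨h1, h2⟩
        · exact Or.inl h
        · exact Or.inr ⟨List.mem_cons_of_mem _ h1, h2⟩
      · intro p hp hpP
        rcases List.mem_cons.mp hp with h | h
        · subst h
          have : ¬ (pvP R C ν p ∧ p ∉ seen) := by
            intro hc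
            exact hg ((pvStep1_guard R C ν hR hC hv hrel p).mpr hc)
          have hpseen : p ∈ seen := by
            by_cases h' : p ∈ seen
            · exact h'
            · exact absurd ⟨hpP, h'⟩ this
          exact c5 p hpseen
        · exact c7 p h hpP

theorem pvFlood1 (R C : Int) (ν : Int × Int → Int) (hR : 0 ≤ R) (hC : 0 ≤ C)
    (hv : ∀ x, ν x = 0 ∨ ν x = 1 ∨ ν x = 2) :
    ∀ (fuel : Nat) (g : List (List Int)) (stack : List (Int × Int))
      (seen : PySem.Set (Int × Int)),
    pvRel1 R C ν seen g → seen.Nodup → (∀ x ∈ seen, pvP R C ν x) →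
    (∀ x ∈ stack, x ∈ seen) →
    (∀ x ∈ seen, x ∉ stack → ∀ y, pvAdj x y → pvP R C ν y → y ∈ seen) →
    5 * (R.toNat * C.toNat - seen.length) + stack.length ≤ fuel →
    ∀ g' seen', solveDfs1 fuel (g, stack, seen) = (g', seen') →
    pvRel1 R C ν seen' g' ∧ seen'.Nodup ∧ (∀ x ∈ seen', pvP R C ν x) ∧
    (∀ x ∈ seen, x ∈ seen') ∧
    (∀ x ∈ seen', x ∈ seen ∨ ∃ s ∈ stack, pvReach (pvP R C ν) s x) ∧
    (∀ x ∈ seen', ∀ y, pvAdj x y → pvP R C ν y → y ∈ seen') := by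
  intro fuel
  induction fuel with
  | zero =>
    intro g stack seen hrel hnd hsP hss hfront hfuel g' seen' heq
    have hstack : stack = [] := by
      rcases stack with _ | ⟨p, rest⟩
      · rfl
      · simp at hfuel
    subst hstack
    obtain ⟨rfl, rfl⟩ : g = g' ∧ seen = seen' := by
      simpa [solveDfs1, Prod.ext_iff] using heq
    exact ⟨hrel, hnd, hsP, fun x hx => hx, fun x hx => Or.inl hx,
      fun x hx y hy hPy => hfront x hx (by simp) y hy hPy⟩
  | succ fuel ih =>
    intro g stack seen hrel hnd hsP hss hfront hfuel g' seen' heq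
    rcases stack with _ | ⟨p, rest⟩
    · obtain ⟨rfl, rfl⟩ : g = g' ∧ seen = seen' := by
        simpa [solveDfs1, Prod.ext_iff] using heq
      exact ⟨hrel, hnd, hsP, fun x hx => hx, fun x hx => Or.inl hx,
        fun x hx y hy hPy => hfront x hx (by simp) y hy hPy⟩
    · have heq' : solveDfs1 fuel ((solveNbrs p).foldl solveStep1 (g, rest, seen)) = (g', seen') := heq
      set st1 := (solveNbrs p).foldl solveStep1 (g, rest, seen) with hst1
      have hfold : (solveNbrs p).foldl solveStep1 (g, rest, seen) = (st1.1, st1.2.1, st1.2.2) := by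
        rw [← hst1]
      obtain ⟨c1, c2, c3, c4, c5, c6, c7, c8, c9⟩ :=
        pvStep1_fold R C ν hR hC hv (solveNbrs p) g rest seen hrel hnd hsP
          (fun x hx => hss x (List.mem_cons_of_mem _ hx)) st1.1 st1.2.1 st1.2.2 hfold
      have hPp : pvP R C ν p := hsP p (hss p List.mem_cons_self)
      -- the new frontier invariant
      have hfront1 : ∀ x ∈ st1.2.2, x ∉ st1.2.1 →
          ∀ y, pvAdj x y → pvP R C ν y → y ∈ st1.2.2 := by
        intro x hx hxs y hy hPy
        by_cases hxseen : x ∈ seen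
        · by_cases hxp : x = p
          · subst hxp
            exact c7 y (mem_solveNbrs.mpr hy) hPy
          · have hxrest : x ∉ rest := fun hr => hxs ((c8 x).mpr (Or.inl hr))
            have hxpr : x ∉ p :: rest := by
              intro hr
              rcases List.mem_cons.mp hr with h | h
              · exact hxp h
              · exact hxrest h
            exact c5 y (hfront x hxseen hxpr y hy hPy)
        · exact absurd ((c8 x).mpr (Or.inr ⟨hx, hxseen⟩)) hxs
      have hsub : seen.length ≤ st1.2.2.length := by
        have h1 : seen.toFinset ⊆ st1.2.2.toFinset := by
          intro y hy
          rw [List.mem_toFinset] at hy ⊢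
          exact c5 y hy
        calc seen.length = seen.toFinset.card := (List.toFinset_card_of_nodup hnd).symm
          _ ≤ st1.2.2.toFinset.card := Finset.card_le_card h1
          _ = st1.2.2.length := List.toFinset_card_of_nodup c2
      have hbound : st1.2.2.length ≤ R.toNat * C.toNat :=
        pvCard_bound c2 (fun x hx => (c3 x hx).1)
      have hfuel1 : 5 * (R.toNat * C.toNat - st1.2.2.length) + st1.2.1.length ≤ fuel := by
        simp only [List.length_cons] at hfuel
        omega
      obtain ⟨f1, f2, f3, f4, f5, f6⟩ :=
        ih st1.1 st1.2.1 st1.2.2 c1 c2 c3 c4 hfront1 hfuel1 g' seen' heq'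
      refine ⟨f1, f2, f3, fun x hx => f4 x (c5 x hx), ?_, f6⟩
      intro x hx
      rcases f5 x hx with hx1 | ⟨s, hs, hreach⟩
      · rcases c6 x hx1 with h | ⟨h1, h2⟩
        · exact Or.inl h
        · refine Or.inr ⟨p, List.mem_cons_self, ?_⟩
          exact pvReach.tail (pvReach.refl p hPp) (mem_solveNbrs.mp h1) h2
      · rcases (c8 s).mp hs with h | ⟨h1, h2⟩
        · exact Or.inr ⟨s, List.mem_cons_of_mem _ h, hreach⟩
        · rcases c6 s h1 with h' | ⟨h1', h2'⟩
          · exact absurd h' h2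
          · refine Or.inr ⟨p, List.mem_cons_self, ?_⟩
            exact pvReach_trans
              (pvReach.tail (pvReach.refl p hPp) (mem_solveNbrs.mp h1') h2') hreach

theorem pvStep2_guard (R C : Int) (Q : Int × Int → Prop) (hR : 0 ≤ R) (hC : 0 ≤ C)
    {new : List (List Int)} (hsh : pvShape R C new)
    (hQ1 : ∀ x, pvIn R C x → (pvGet new x.1 x.2 = 1 ↔ Q x))
    (hQin : ∀ x, Q x → pvIn R C x)
    {seen : PySem.Set (Int × Int)} (q : Int × Int) :
    (0 ≤ q.1 ∧ q.1 < PySem.List.len new ∧ 0 ≤ q.2 ∧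
      q.2 < PySem.List.len (PySem.List.pyGetD new 0 []) ∧
      pvGet new q.1 q.2 = 1 ∧ q ∉ seen)
      ↔ (Q q ∧ q ∉ seen) := by
  obtain ⟨hlen, hrows⟩ := hsh
  constructor
  · rintro ⟨h1, h2, h3, h4, h5, h6⟩
    have hq1 : q.1 < R := by rw [PySem.List.len_eq, hlen] at h2; omega
    have hg0 : new ≠ [] := by
      intro h; subst h; simp [PySem.List.len] at h2; omega
    have hrow0 : PySem.List.pyGetD new 0 [] = new.head hg0 := by
      rw [PySem.List.pyGetD_zero]
      cases new with
      | nil => simp at hg0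
      | cons r t => rfl
    have hq2 : q.2 < C := by
      rw [hrow0, PySem.List.len_eq, hrows _ (List.head_mem hg0)] at h4; omega
    exact ⟨(hQ1 q ⟨h1, hq1, h3, hq2⟩).mp h5, h6⟩
  · rintro ⟨hQq, h6⟩
    obtain ⟨hq1, hq2, hq3, hq4⟩ := hQin q hQq
    have hg0 : new ≠ [] := by
      intro h
      rw [h] at hlen; simp at hlen; omega
    have hrow0 : PySem.List.pyGetD new 0 [] = new.head hg0 := by
      rw [PySem.List.pyGetD_zero]
      cases new with
      | nil => simp at hg0
      | cons r t => rfl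
    refine ⟨hq1, by rw [PySem.List.len_eq, hlen]; omega, hq3, ?_, ?_, h6⟩
    · rw [hrow0, PySem.List.len_eq, hrows _ (List.head_mem hg0)]; omega
    · exact (hQ1 q ⟨hq1, hq2, hq3, hq4⟩).mpr hQq

theorem pvStep2_fold (R C : Int) (Q : Int × Int → Prop) (hR : 0 ≤ R) (hC : 0 ≤ C)
    {new : List (List Int)} (hsh : pvShape R C new)
    (hQ1 : ∀ x, pvIn R C x → (pvGet new x.1 x.2 = 1 ↔ Q x))
    (hQin : ∀ x, Q x → pvIn R C x) :
    ∀ (ns : List (Int × Int)) (stack : List (Int × Int)) (seen : PySem.Set (Int × Int)),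
    seen.Nodup → (∀ x ∈ seen, Q x) →
    ∀ stack' seen', ns.foldl (solveStep2 new) (stack, seen) = (stack', seen') →
    seen'.Nodup ∧ (∀ x ∈ seen', Q x) ∧
    (∀ x ∈ seen, x ∈ seen') ∧
    (∀ x ∈ seen', x ∈ seen ∨ (x ∈ ns ∧ Q x)) ∧
    (∀ q ∈ ns, Q q → q ∈ seen') ∧
    (∀ x, x ∈ stack' ↔ x ∈ stack ∨ (x ∈ seen' ∧ x ∉ seen)) ∧
    seen'.length + stack.length = seen.length + stack'.length := by
  intro ns
  induction ns with
  | nil =>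
    intro stack seen hnd hsQ stack' seen' heq
    obtain ⟨rfl, rfl⟩ : stack = stack' ∧ seen = seen' := by
      simpa [Prod.ext_iff] using heq
    refine ⟨hnd, hsQ, fun x hx => hx, fun x hx => Or.inl hx, by simp, ?_, by omega⟩
    intro x
    constructor
    · intro h; exact Or.inl h
    · rintro (h | ⟨h1, h2⟩)
      · exact h
      · exact absurd h1 h2
  | cons q ns ih =>
    intro stack seen hnd hsQ stack' seen' heq
    rw [List.foldl_cons] at heq
    by_cases hg : (0 ≤ q.1 ∧ q.1 < PySem.List.len new ∧ 0 ≤ q.2 ∧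
        q.2 < PySem.List.len (PySem.List.pyGetD new 0 []) ∧
        pvGet new q.1 q.2 = 1 ∧ q ∉ seen)
    · have hstep : solveStep2 new (stack, seen) q = (q :: stack, PySem.Set.add seen q) := by
        simp only [solveStep2]; rw [if_pos hg]
      obtain ⟨hqQ, hqns⟩ := (pvStep2_guard R C Q hR hC hsh hQ1 hQin q).mp hg
      rw [hstep] at heq
      have hnd1 : (PySem.Set.add seen q).Nodup := PySem.Set.nodup_add _ _ hnd
      have hsQ1 : ∀ x ∈ PySem.Set.add seen q, Q x := by
        intro x hx
        rcases (PySem.Set.mem_add _ _ _).mp hx with h | h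
        · exact hsQ x h
        · rw [h]; exact hqQ
      obtain ⟨c2, c3, c5, c6, c7, c8, c9⟩ := ih _ _ hnd1 hsQ1 stack' seen' heq
      have hmem_add : ∀ x, x ∈ PySem.Set.add seen q ↔ (x ∈ seen ∨ x = q) :=
        fun x => PySem.Set.mem_add _ _ _
      have hlen_add : (PySem.Set.add seen q).length = seen.length + 1 := by
        rw [PySem.Set.add_of_not_mem hqns, List.length_append, List.length_singleton]
      refine ⟨c2, c3, ?_, ?_, ?_, ?_,
        by rw [hlen_add] at c9; simp only [List.length_cons] at c9; omega⟩
      · intro x hx; exact c5 x ((hmem_add x).2 (Or.inl hx))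
      · intro x hx
        rcases c6 x hx with h | ⟨h1, h2⟩
        · rcases (hmem_add x).mp h with h' | h'
          · exact Or.inl h'
          · rw [h']; exact Or.inr ⟨List.mem_cons_self, hqQ⟩
        · exact Or.inr ⟨List.mem_cons_of_mem _ h1, h2⟩
      · intro p hp hpQ
        rcases List.mem_cons.mp hp with h | h
        · rw [h]; exact c5 q ((hmem_add q).2 (Or.inr rfl))
        · exact c7 p h hpQ
      · intro x
        rw [c8 x]
        constructor
        · rintro (h | ⟨h1, h2⟩)
          · rcases List.mem_cons.mp h with h' | h'
            · refine Or.inr ?_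
              rw [h']
              exact ⟨c5 q ((hmem_add q).2 (Or.inr rfl)), hqns⟩
            · exact Or.inl h'
          · refine Or.inr ⟨h1, ?_⟩
            intro hx
            exact h2 ((hmem_add x).2 (Or.inl hx))
        · rintro (h | ⟨h1, h2⟩)
          · exact Or.inl (List.mem_cons_of_mem _ h)
          · by_cases hxq : x = q
            · rw [hxq]; exact Or.inl List.mem_cons_self
            · refine Or.inr ⟨h1, ?_⟩
              intro hx
              rcases (hmem_add x).mp hx with h' | h'
              · exact h2 h'
              · exact hxq h'
    · have hstep : solveStep2 new (stack, seen) q = (stack, seen) := by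
        simp only [solveStep2]; rw [if_neg hg]
      rw [hstep] at heq
      obtain ⟨c2, c3, c5, c6, c7, c8, c9⟩ := ih _ _ hnd hsQ stack' seen' heq
      refine ⟨c2, c3, c5, ?_, ?_, c8, c9⟩
      · intro x hx
        rcases c6 x hx with h | ⟨h1, h2⟩
        · exact Or.inl h
        · exact Or.inr ⟨List.mem_cons_of_mem _ h1, h2⟩
      · intro p hp hpQ
        rcases List.mem_cons.mp hp with h | h
        · subst h
          have hng : ¬ (Q p ∧ p ∉ seen) := by
            intro hc
            exact hg ((pvStep2_guard R C Q hR hC hsh hQ1 hQin p).mpr hc)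
          have hpseen : p ∈ seen := by
            by_cases h' : p ∈ seen
            · exact h'
            · exact absurd ⟨hpQ, h'⟩ hng
          exact c5 p hpseen
        · exact c7 p h hpQ

theorem pvFlood2 (R C : Int) (Q : Int × Int → Prop) (hR : 0 ≤ R) (hC : 0 ≤ C)
    {new : List (List Int)} (hsh : pvShape R C new)
    (hQ1 : ∀ x, pvIn R C x → (pvGet new x.1 x.2 = 1 ↔ Q x))
    (hQin : ∀ x, Q x → pvIn R C x) :
    ∀ (fuel : Nat) (stack : List (Int × Int)) (seen : PySem.Set (Int × Int)),
    seen.Nodup → (∀ x ∈ seen, Q x) → (∀ x ∈ stack, Q x) →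
    (∀ x ∈ seen, x ∉ stack → ∀ y, pvAdj x y → Q y → y ∈ seen) →
    5 * (R.toNat * C.toNat - seen.length) + stack.length ≤ fuel →
    ∀ seen', solveDfs2 new fuel stack seen = seen' →
    seen'.Nodup ∧ (∀ x ∈ seen', Q x) ∧ (∀ x ∈ seen, x ∈ seen') ∧
    (∀ x ∈ seen', x ∈ seen ∨ ∃ s ∈ stack, pvReach Q s x) ∧
    (∀ x ∈ seen', ∀ y, pvAdj x y → Q y → y ∈ seen') ∧
    (∀ s ∈ stack, ∀ y, pvAdj s y → Q y → y ∈ seen') ∧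
    (∀ x ∈ seen', x ∈ seen ∨ ∃ z, pvAdj z x ∧ Q z) := by
  intro fuel
  induction fuel with
  | zero =>
    intro stack seen hnd hsQ hstQ hfront hfuel seen' heq
    have hstack : stack = [] := by
      rcases stack with _ | ⟨p, rest⟩
      · rfl
      · simp at hfuel
    subst hstack
    obtain rfl : seen = seen' := heq
    exact ⟨hnd, hsQ, fun x hx => hx, fun x hx => Or.inl hx,
      fun x hx y hy hQy => hfront x hx (by simp) y hy hQy, by simp,
      fun x hx => Or.inl hx⟩
  | succ fuel ih =>
    intro stack seen hnd hsQ hstQ hfront hfuel seen' heq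
    rcases stack with _ | ⟨p, rest⟩
    · obtain rfl : seen = seen' := heq
      exact ⟨hnd, hsQ, fun x hx => hx, fun x hx => Or.inl hx,
        fun x hx y hy hQy => hfront x hx (by simp) y hy hQy, by simp,
        fun x hx => Or.inl hx⟩
    · have heq' : solveDfs2 new fuel ((solveNbrs p).foldl (solveStep2 new) (rest, seen)).1
          ((solveNbrs p).foldl (solveStep2 new) (rest, seen)).2 = seen' := heq
      set st1 := (solveNbrs p).foldl (solveStep2 new) (rest, seen) with hst1
      have hfold : (solveNbrs p).foldl (solveStep2 new) (rest, seen) = (st1.1, st1.2) := rfl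
      obtain ⟨c2, c3, c5, c6, c7, c8, c9⟩ :=
        pvStep2_fold R C Q hR hC hsh hQ1 hQin (solveNbrs p) rest seen hnd hsQ st1.1 st1.2 hfold
      have hQp : Q p := hstQ p List.mem_cons_self
      have hst1Q : ∀ x ∈ st1.1, Q x := by
        intro x hx
        rcases (c8 x).mp hx with h | ⟨h1, _⟩
        · exact hstQ x (List.mem_cons_of_mem _ h)
        · exact c3 x h1
      have hfront1 : ∀ x ∈ st1.2, x ∉ st1.1 → ∀ y, pvAdj x y → Q y → y ∈ st1.2 := by
        intro x hx hxs y hy hQy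
        by_cases hxseen : x ∈ seen
        · by_cases hxp : x = p
          · subst hxp
            exact c7 y (mem_solveNbrs.mpr hy) hQy
          · have hxrest : x ∉ rest := fun hr => hxs ((c8 x).mpr (Or.inl hr))
            have hxpr : x ∉ p :: rest := by
              intro hr
              rcases List.mem_cons.mp hr with h | h
              · exact hxp h
              · exact hxrest h
            exact c5 y (hfront x hxseen hxpr y hy hQy)
        · exact absurd ((c8 x).mpr (Or.inr ⟨hx, hxseen⟩)) hxs
      have hsub : seen.length ≤ st1.2.length := by
        have h1 : seen.toFinset ⊆ st1.2.toFinset := by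
          intro y hy
          rw [List.mem_toFinset] at hy ⊢
          exact c5 y hy
        calc seen.length = seen.toFinset.card := (List.toFinset_card_of_nodup hnd).symm
          _ ≤ st1.2.toFinset.card := Finset.card_le_card h1
          _ = st1.2.length := List.toFinset_card_of_nodup c2
      have hbound : st1.2.length ≤ R.toNat * C.toNat :=
        pvCard_bound c2 (fun x hx => hQin x (c3 x hx))
      have hfuel1 : 5 * (R.toNat * C.toNat - st1.2.length) + st1.1.length ≤ fuel := by
        simp only [List.length_cons] at hfuel
        omega
      obtain ⟨f2, f3, f4, f5, f6, f7, f8⟩ := ih st1.1 st1.2 c2 c3 hst1Q hfront1 hfuel1 seen' heq'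
      have hcover : ∀ y, pvAdj p y → Q y → y ∈ seen' := by
        intro y hy hQy
        exact f4 y (c7 y (mem_solveNbrs.mpr hy) hQy)
      have hQp' : Q p := hQp
      refine ⟨f2, f3, fun x hx => f4 x (c5 x hx), ?_, f6, ?_, ?_⟩
      · intro x hx
        rcases f5 x hx with hx1 | ⟨s, hs, hreach⟩
        · rcases c6 x hx1 with h | ⟨h1, h2⟩
          · exact Or.inl h
          · refine Or.inr ⟨p, List.mem_cons_self, ?_⟩
            exact pvReach.tail (pvReach.refl p hQp) (mem_solveNbrs.mp h1) h2
        · rcases (c8 s).mp hs with h | ⟨h1, h2⟩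
          · exact Or.inr ⟨s, List.mem_cons_of_mem _ h, hreach⟩
          · rcases c6 s h1 with h' | ⟨h1', h2'⟩
            · exact absurd h' h2
            · refine Or.inr ⟨p, List.mem_cons_self, ?_⟩
              exact pvReach_trans
                (pvReach.tail (pvReach.refl p hQp) (mem_solveNbrs.mp h1') h2') hreach
      · intro s hs y hy hQy
        rcases List.mem_cons.mp hs with h | h
        · subst h; exact hcover y hy hQy
        · exact f7 s ((c8 s).mpr (Or.inl h)) y hy hQy
      · intro x hx
        rcases f8 x hx with h | h
        · rcases c6 x h with h' | ⟨h1, h2⟩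
          · exact Or.inl h'
          · exact Or.inr ⟨p, mem_solveNbrs.mp h1, hQp'⟩
        · exact Or.inr h

theorem pvStepB_guard (R C : Int) (ν : Int × Int → Int)
    {grid : List (List Int)}
    (hg0 : ∀ x, pvIn R C x → (pvGet grid x.1 x.2 ≠ 0 ↔ ν x ≠ 0))
    {seen : PySem.Set (Int × Int)} (q : Int × Int) :
    (0 ≤ q.1 ∧ q.1 < R ∧ 0 ≤ q.2 ∧ q.2 < C ∧ pvGet grid q.1 q.2 ≠ 0 ∧ q ∉ seen)
      ↔ (pvP R C ν q ∧ q ∉ seen) := by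
  constructor
  · rintro ⟨h1, h2, h3, h4, h5, h6⟩
    exact ⟨⟨⟨h1, h2, h3, h4⟩, (hg0 q ⟨h1, h2, h3, h4⟩).mp h5⟩, h6⟩
  · rintro ⟨⟨hin, hnz⟩, h6⟩
    obtain ⟨h1, h2, h3, h4⟩ := hin
    exact ⟨h1, h2, h3, h4, (hg0 q ⟨h1, h2, h3, h4⟩).mpr hnz, h6⟩

theorem pvStepB_fold (R C : Int) (ν : Int × Int → Int)
    {grid : List (List Int)}
    (hg0 : ∀ x, pvIn R C x → (pvGet grid x.1 x.2 ≠ 0 ↔ ν x ≠ 0)) :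
    ∀ (ns : List (Int × Int)) (stack : List (Int × Int)) (seen : PySem.Set (Int × Int)),
    seen.Nodup → stack.Nodup → (∀ x ∈ seen, pvP R C ν x) → (∀ x ∈ stack, x ∈ seen) →
    ∀ stack' seen', ns.foldl (solveAltStep grid R C) (stack, seen) = (stack', seen') →
    seen'.Nodup ∧ stack'.Nodup ∧ (∀ x ∈ seen', pvP R C ν x) ∧
    (∀ x ∈ stack', x ∈ seen') ∧ (∀ x ∈ seen, x ∈ seen') ∧
    (∀ x ∈ seen', x ∈ seen ∨ (x ∈ ns ∧ pvP R C ν x)) ∧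
    (∀ q ∈ ns, pvP R C ν q → q ∈ seen') ∧
    (∀ x, x ∈ stack' ↔ x ∈ stack ∨ (x ∈ seen' ∧ x ∉ seen)) ∧
    seen'.length + stack.length = seen.length + stack'.length := by
  intro ns
  induction ns with
  | nil =>
    intro stack seen hnd hstnd hsP hss stack' seen' heq
    obtain ⟨rfl, rfl⟩ : stack = stack' ∧ seen = seen' := by
      simpa [Prod.ext_iff] using heq
    refine ⟨hnd, hstnd, hsP, hss, fun x hx => hx, fun x hx => Or.inl hx, by simp, ?_, by omega⟩
    intro x
    constructor
    · intro h; exact Or.inl h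
    · rintro (h | ⟨h1, h2⟩)
      · exact h
      · exact absurd h1 h2
  | cons q ns ih =>
    intro stack seen hnd hstnd hsP hss stack' seen' heq
    rw [List.foldl_cons] at heq
    by_cases hg : (0 ≤ q.1 ∧ q.1 < R ∧ 0 ≤ q.2 ∧ q.2 < C ∧
        pvGet grid q.1 q.2 ≠ 0 ∧ q ∉ seen)
    · have hstep : solveAltStep grid R C (stack, seen) q = (q :: stack, PySem.Set.add seen q) := by
        simp only [solveAltStep]; rw [if_pos hg]
      obtain ⟨hqP, hqns⟩ := (pvStepB_guard R C ν hg0 q).mp hg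
      rw [hstep] at heq
      have hnd1 : (PySem.Set.add seen q).Nodup := PySem.Set.nodup_add _ _ hnd
      have hstnd1 : (q :: stack).Nodup := by
        refine List.nodup_cons.mpr ⟨fun hqs => hqns (hss q hqs), hstnd⟩
      have hsP1 : ∀ x ∈ PySem.Set.add seen q, pvP R C ν x := by
        intro x hx
        rcases (PySem.Set.mem_add _ _ _).mp hx with h | h
        · exact hsP x h
        · rw [h]; exact hqP
      have hss1 : ∀ x ∈ q :: stack, x ∈ PySem.Set.add seen q := by
        intro x hx
        rw [PySem.Set.mem_add _ _ _]
        rcases List.mem_cons.mp hx with h | h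
        · exact Or.inr h
        · exact Or.inl (hss x h)
      obtain ⟨c1, c1', c3, c4, c5, c6, c7, c8, c9⟩ := ih _ _ hnd1 hstnd1 hsP1 hss1 stack' seen' heq
      have hmem_add : ∀ x, x ∈ PySem.Set.add seen q ↔ (x ∈ seen ∨ x = q) :=
        fun x => PySem.Set.mem_add _ _ _
      have hlen_add : (PySem.Set.add seen q).length = seen.length + 1 := by
        rw [PySem.Set.add_of_not_mem hqns, List.length_append, List.length_singleton]
      refine ⟨c1, c1', c3, c4, ?_, ?_, ?_, ?_,
        by rw [hlen_add] at c9; simp only [List.length_cons] at c9; omega⟩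
      · intro x hx; exact c5 x ((hmem_add x).2 (Or.inl hx))
      · intro x hx
        rcases c6 x hx with h | ⟨h1, h2⟩
        · rcases (hmem_add x).mp h with h' | h'
          · exact Or.inl h'
          · rw [h']; exact Or.inr ⟨List.mem_cons_self, hqP⟩
        · exact Or.inr ⟨List.mem_cons_of_mem _ h1, h2⟩
      · intro p hp hpP
        rcases List.mem_cons.mp hp with h | h
        · rw [h]; exact c5 q ((hmem_add q).2 (Or.inr rfl))
        · exact c7 p h hpP
      · intro x
        rw [c8 x]
        constructor
        · rintro (h | ⟨h1, h2⟩)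
          · rcases List.mem_cons.mp h with h' | h'
            · refine Or.inr ?_
              rw [h']
              exact ⟨c5 q ((hmem_add q).2 (Or.inr rfl)), hqns⟩
            · exact Or.inl h'
          · refine Or.inr ⟨h1, ?_⟩
            intro hx
            exact h2 ((hmem_add x).2 (Or.inl hx))
        · rintro (h | ⟨h1, h2⟩)
          · exact Or.inl (List.mem_cons_of_mem _ h)
          · by_cases hxq : x = q
            · rw [hxq]; exact Or.inl List.mem_cons_self
            · refine Or.inr ⟨h1, ?_⟩
              intro hx
              rcases (hmem_add x).mp hx with h' | h'
              · exact h2 h'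
              · exact hxq h'
    · have hstep : solveAltStep grid R C (stack, seen) q = (stack, seen) := by
        simp only [solveAltStep]; rw [if_neg hg]
      rw [hstep] at heq
      obtain ⟨c1, c1', c3, c4, c5, c6, c7, c8, c9⟩ := ih _ _ hnd hstnd hsP hss stack' seen' heq
      refine ⟨c1, c1', c3, c4, c5, ?_, ?_, c8, c9⟩
      · intro x hx
        rcases c6 x hx with h | ⟨h1, h2⟩
        · exact Or.inl h
        · exact Or.inr ⟨List.mem_cons_of_mem _ h1, h2⟩
      · intro p hp hpP
        rcases List.mem_cons.mp hp with h | h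
        · subst h
          have hng : ¬ (pvP R C ν p ∧ p ∉ seen) := by
            intro hc
            exact hg ((pvStepB_guard R C ν hg0 p).mpr hc)
          have hpseen : p ∈ seen := by
            by_cases h' : p ∈ seen
            · exact h'
            · exact absurd ⟨hpP, h'⟩ hng
          exact c5 p hpseen
        · exact c7 p h hpP

theorem pvFloodB (R C : Int) (ν : Int × Int → Int) (hR : 0 ≤ R) (hC : 0 ≤ C)
    {grid : List (List Int)}
    (hg0 : ∀ x, pvIn R C x → (pvGet grid x.1 x.2 ≠ 0 ↔ ν x ≠ 0))
    (hg1 : ∀ x, pvIn R C x → (pvGet grid x.1 x.2 = 1 ↔ ν x = 2))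
    (O : List (Int × Int)) (p0 : Bool) :
    ∀ (fuel : Nat) (pure : Bool) (stack : List (Int × Int)) (seen : PySem.Set (Int × Int)),
    seen.Nodup → stack.Nodup → (∀ x ∈ seen, pvP R C ν x) → (∀ x ∈ stack, x ∈ seen) →
    (∀ x ∈ O, x ∈ seen) → (∀ x ∈ stack, x ∉ O) →
    (pure = true ↔ (p0 = true ∧ ∀ x ∈ seen, x ∉ O → x ∉ stack → ν x ≠ 2)) →
    (∀ x ∈ seen, x ∉ stack → ∀ y, pvAdj x y → pvP R C ν y → y ∈ seen) →
    5 * (R.toNat * C.toNat - seen.length) + stack.length ≤ fuel →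
    ∀ pure' seen', solveAltDfs grid R C fuel pure stack seen = (pure', seen') →
    seen'.Nodup ∧ (∀ x ∈ seen', pvP R C ν x) ∧ (∀ x ∈ seen, x ∈ seen') ∧
    (∀ x ∈ seen', x ∈ seen ∨ ∃ s ∈ stack, pvReach (pvP R C ν) s x) ∧
    (∀ x ∈ seen', ∀ y, pvAdj x y → pvP R C ν y → y ∈ seen') ∧
    (pure' = true ↔ (p0 = true ∧ ∀ x ∈ seen', x ∉ O → ν x ≠ 2)) := by
  intro fuel
  induction fuel with
  | zero =>
    intro pure stack seen hnd hstnd hsP hss hO hsO hpure hfront hfuel pure' seen' heq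
    have hstack : stack = [] := by
      rcases stack with _ | ⟨p, rest⟩
      · rfl
      · simp at hfuel
    subst hstack
    obtain ⟨rfl, rfl⟩ : pure = pure' ∧ seen = seen' := by
      simpa [solveAltDfs, Prod.ext_iff] using heq
    refine ⟨hnd, hsP, fun x hx => hx, fun x hx => Or.inl hx,
      fun x hx y hy hPy => hfront x hx (by simp) y hy hPy, ?_⟩
    simpa using hpure
  | succ fuel ih =>
    intro pure stack seen hnd hstnd hsP hss hO hsO hpure hfront hfuel pure' seen' heq
    rcases stack with _ | ⟨p, rest⟩
    · obtain ⟨rfl, rfl⟩ : pure = pure' ∧ seen = seen' := by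
        simpa [solveAltDfs, Prod.ext_iff] using heq
      refine ⟨hnd, hsP, fun x hx => hx, fun x hx => Or.inl hx,
        fun x hx y hy hPy => hfront x hx (by simp) y hy hPy, ?_⟩
      simpa using hpure
    · have hPp : pvP R C ν p := hsP p (hss p List.mem_cons_self)
      have hpO : p ∉ O := hsO p List.mem_cons_self
      have hprest : p ∉ rest := (List.nodup_cons.mp hstnd).1
      set pure1 : Bool := if pvGet grid p.1 p.2 = 1 then false else pure with hpure1def
      have heq' : solveAltDfs grid R C fuel pure1
          ([(p.1 - 1, p.2), (p.1 + 1, p.2), (p.1, p.2 - 1), (p.1, p.2 + 1)].foldl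
            (solveAltStep grid R C) (rest, seen)).1
          ([(p.1 - 1, p.2), (p.1 + 1, p.2), (p.1, p.2 - 1), (p.1, p.2 + 1)].foldl
            (solveAltStep grid R C) (rest, seen)).2 = (pure', seen') := heq
      set st1 := [(p.1 - 1, p.2), (p.1 + 1, p.2), (p.1, p.2 - 1), (p.1, p.2 + 1)].foldl
        (solveAltStep grid R C) (rest, seen) with hst1
      have hfold : [(p.1 - 1, p.2), (p.1 + 1, p.2), (p.1, p.2 - 1), (p.1, p.2 + 1)].foldl
          (solveAltStep grid R C) (rest, seen) = (st1.1, st1.2) := rfl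
      obtain ⟨c1, c1', c3, c4, c5, c6, c7, c8, c9⟩ :=
        pvStepB_fold R C ν hg0 _ rest seen hnd (List.nodup_cons.mp hstnd).2 hsP
          (fun x hx => hss x (List.mem_cons_of_mem _ hx)) st1.1 st1.2 hfold
      -- invariants for the recursive call
      have hsO1 : ∀ x ∈ st1.1, x ∉ O := by
        intro x hx hxO
        rcases (c8 x).mp hx with h | ⟨h1, h2⟩
        · exact hsO x (List.mem_cons_of_mem _ h) hxO
        · exact h2 (hO x hxO)
      have hpure1 : pure1 = true ↔
          (p0 = true ∧ ∀ x ∈ st1.2, x ∉ O → x ∉ st1.1 → ν x ≠ 2) := by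
      -- key purity step
        have hpseen : p ∈ seen := hss p List.mem_cons_self
        have hpst1 : p ∉ st1.1 := by
          intro hp1
          rcases (c8 p).mp hp1 with h | ⟨_, h2⟩
          · exact hprest h
          · exact h2 hpseen
        by_cases hνp : ν p = 2
        · have : pvGet grid p.1 p.2 = 1 := (hg1 p hPp.1).mpr hνp
          rw [hpure1def, if_pos this]
          simp only [Bool.false_eq_true, false_iff]
          intro ⟨_, hall⟩
          exact hall p (c5 p hpseen) hpO hpst1 hνp
        · have : ¬ (pvGet grid p.1 p.2 = 1) := fun h => hνp ((hg1 p hPp.1).mp h)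
          rw [hpure1def, if_neg this, hpure]
          constructor
          · rintro ⟨hp0, hall⟩
            refine ⟨hp0, ?_⟩
            intro x hx hxO hxst1
            rcases c6 x hx with hxseen | ⟨h1, h2⟩
            · by_cases hxp : x = p
              · rw [hxp]; exact hνp
              · have hxrest : x ∉ rest := fun hr => hxst1 ((c8 x).mpr (Or.inl hr))
                exact hall x hxseen hxO (by
                  intro hc
                  rcases List.mem_cons.mp hc with h | h
                  · exact hxp h
                  · exact hxrest h)
            · by_cases hxseen : x ∈ seen
              · by_cases hxp : x = p
                · rw [hxp]; exact hνp
                · have hxrest : x ∉ rest := fun hr => hxst1 ((c8 x).mpr (Or.inl hr))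
                  exact hall x hxseen hxO (by
                    intro hc
                    rcases List.mem_cons.mp hc with h | h
                    · exact hxp h
                    · exact hxrest h)
              · exact absurd ((c8 x).mpr (Or.inr ⟨hx, hxseen⟩)) hxst1
          · rintro ⟨hp0, hall⟩
            refine ⟨hp0, ?_⟩
            intro x hxseen hxO hxstack
            have hxrest : x ∉ rest := fun hr => hxstack (List.mem_cons_of_mem _ hr)
            have hxst1 : x ∉ st1.1 := by
              intro hc
              rcases (c8 x).mp hc with h | ⟨_, h2⟩
              · exact hxrest h
              · exact h2 hxseen
            exact hall x (c5 x hxseen) hxO hxst1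
      have hfront1 : ∀ x ∈ st1.2, x ∉ st1.1 → ∀ y, pvAdj x y → pvP R C ν y → y ∈ st1.2 := by
        intro x hx hxs y hy hPy
        by_cases hxseen : x ∈ seen
        · by_cases hxp : x = p
          · subst hxp
            exact c7 y (mem_nbrsB.mpr hy) hPy
          · have hxrest : x ∉ rest := fun hr => hxs ((c8 x).mpr (Or.inl hr))
            have hxpr : x ∉ p :: rest := by
              intro hr
              rcases List.mem_cons.mp hr with h | h
              · exact hxp h
              · exact hxrest h
            exact c5 y (hfront x hxseen hxpr y hy hPy)
        · exact absurd ((c8 x).mpr (Or.inr ⟨hx, hxseen⟩)) hxs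
      have hsub : seen.length ≤ st1.2.length := by
        have h1 : seen.toFinset ⊆ st1.2.toFinset := by
          intro y hy
          rw [List.mem_toFinset] at hy ⊢
          exact c5 y hy
        calc seen.length = seen.toFinset.card := (List.toFinset_card_of_nodup hnd).symm
          _ ≤ st1.2.toFinset.card := Finset.card_le_card h1
          _ = st1.2.length := List.toFinset_card_of_nodup c1
      have hbound : st1.2.length ≤ R.toNat * C.toNat :=
        pvCard_bound c1 (fun x hx => (c3 x hx).1)
      have hfuel1 : 5 * (R.toNat * C.toNat - st1.2.length) + st1.1.length ≤ fuel := by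
        simp only [List.length_cons] at hfuel
        omega
      obtain ⟨f1, f3, f4, f5, f6, f7⟩ :=
        ih pure1 st1.1 st1.2 c1 c1' c3 c4 (fun x hx => c5 x (hO x hx)) hsO1 hpure1
          hfront1 hfuel1 pure' seen' heq'
      refine ⟨f1, f3, fun x hx => f4 x (c5 x hx), ?_, f6, f7⟩
      intro x hx
      rcases f5 x hx with hx1 | ⟨s, hs, hreach⟩
      · rcases c6 x hx1 with h | ⟨h1, h2⟩
        · exact Or.inl h
        · refine Or.inr ⟨p, List.mem_cons_self, ?_⟩
          exact pvReach.tail (pvReach.refl p hPp) (mem_nbrsB.mp h1) h2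
      · rcases (c8 s).mp hs with h | ⟨h1, h2⟩
        · exact Or.inr ⟨s, List.mem_cons_of_mem _ h, hreach⟩
        · rcases c6 s h1 with h' | ⟨h1', h2'⟩
          · exact absurd h' h2
          · refine Or.inr ⟨p, List.mem_cons_self, ?_⟩
            exact pvReach_trans
              (pvReach.tail (pvReach.refl p hPp) (mem_nbrsB.mp h1') h2') hreach

theorem pvCompCover {Q : Int × Int → Prop} {S : List (Int × Int)} {x : Int × Int}
    (hsat : ∀ z ∈ S, ∀ y, pvAdj z y → Q y → y ∈ S)
    (hob : ∀ y, pvAdj x y → Q y → y ∈ S) :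
    ∀ y, pvReach Q x y → y = x ∨ y ∈ S := by
  intro y h
  induction h with
  | refl _ => exact Or.inl rfl
  | tail hxy hadj hQ ih =>
    rcases ih with h | h
    · subst h
      exact Or.inr (hob _ hadj hQ)
    · exact Or.inr (hsat _ h _ hadj hQ)

def pvScan1Step (fuel : Nat) (st : List (List Int) × PySem.Set (Int × Int))
    (x : Int × Int) : List (List Int) × PySem.Set (Int × Int) :=
  if pvGet st.1 x.1 x.2 = 2 ∧ x ∉ st.2 then
    solveDfs1 fuel (pvSet st.1 x.1 x.2 0, [x], PySem.Set.add st.2 x)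
  else st

theorem pvScan1 (R C : Int) (ν : Int × Int → Int) (hR : 0 ≤ R) (hC : 0 ≤ C)
    (hv : ∀ x, ν x = 0 ∨ ν x = 1 ∨ ν x = 2) (fuel : Nat)
    (hfuel : 5 * (R.toNat * C.toNat) + 1 ≤ fuel) :
    ∀ (L : List (Int × Int)), (∀ x ∈ L, pvIn R C x) →
    ∀ (g : List (List Int)) (seen : PySem.Set (Int × Int)),
    pvRel1 R C ν seen g → seen.Nodup → (∀ x ∈ seen, pvP R C ν x) →
    pvSat (pvP R C ν) seen → (∀ x ∈ seen, pvRem R C ν x) →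
    ∀ g' seen', L.foldl (pvScan1Step fuel) (g, seen) = (g', seen') →
    pvRel1 R C ν seen' g' ∧ seen'.Nodup ∧ (∀ x ∈ seen', pvP R C ν x) ∧
    pvSat (pvP R C ν) seen' ∧ (∀ x ∈ seen', pvRem R C ν x) ∧
    (∀ x ∈ seen, x ∈ seen') ∧ (∀ x ∈ L, ν x = 2 → x ∈ seen') := by
  intro L
  induction L with
  | nil =>
    intro hL g seen hrel hnd hsP hsat hrem g' seen' heq
    obtain ⟨rfl, rfl⟩ : g = g' ∧ seen = seen' := by
      simpa [Prod.ext_iff] using heq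
    exact ⟨hrel, hnd, hsP, hsat, hrem, fun x hx => hx, by simp⟩
  | cons x L ih =>
    intro hL g seen hrel hnd hsP hsat hrem g' seen' heq
    rw [List.foldl_cons] at heq
    have hxin : pvIn R C x := hL x List.mem_cons_self
    have hgx : pvGet g x.1 x.2 = (if x ∈ seen then 0 else ν x) := hrel.2 x hxin
    by_cases htr : pvGet g x.1 x.2 = 2 ∧ x ∉ seen
    · have hx2 : ν x = 2 := by
        rw [hgx, if_neg htr.2] at htr
        exact htr.1
      have hxP : pvP R C ν x := ⟨hxin, by omega⟩
      have hstep : pvScan1Step fuel (g, seen) x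
          = solveDfs1 fuel (pvSet g x.1 x.2 0, [x], PySem.Set.add seen x) := by
        simp only [pvScan1Step]; rw [if_pos htr]
      rw [hstep] at heq
      have hrel1 : pvRel1 R C ν (PySem.Set.add seen x) (pvSet g x.1 x.2 0) := by
        refine ⟨pvShape_set hrel.1 hxin, ?_⟩
        intro y hy
        rw [pvGet_set hrel.1 hxin (show pvIn R C (y.1, y.2) from hy)]
        by_cases hyx : y = x
        · subst hyx; simp [PySem.Set.mem_add]
        · have hne : ¬ ((y.1, y.2) = (x.1, x.2)) := by
            intro h
            exact hyx (Prod.ext_iff.mpr ⟨congrArg Prod.fst h, congrArg Prod.snd h⟩)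
          rw [if_neg hne, hrel.2 y hy]
          have hiff : (y ∈ PySem.Set.add seen x) ↔ y ∈ seen := by
            rw [PySem.Set.mem_add]; simp [hyx]
          rw [if_congr hiff rfl rfl]
      have hnd1 : (PySem.Set.add seen x).Nodup := PySem.Set.nodup_add _ _ hnd
      have hsP1 : ∀ y ∈ PySem.Set.add seen x, pvP R C ν y := by
        intro y hy
        rcases (PySem.Set.mem_add _ _ _).mp hy with h | h
        · exact hsP y h
        · rw [h]; exact hxP
      have hss1 : ∀ y ∈ [x], y ∈ PySem.Set.add seen x := by
        intro y hy
        rw [List.mem_singleton.mp hy, PySem.Set.mem_add]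
        exact Or.inr rfl
      have hfront1 : ∀ y ∈ PySem.Set.add seen x, y ∉ [x] →
          ∀ z, pvAdj y z → pvP R C ν z → z ∈ PySem.Set.add seen x := by
        intro y hy hys z hz hPz
        rcases (PySem.Set.mem_add _ _ _).mp hy with h | h
        · rw [PySem.Set.mem_add]
          exact Or.inl (hsat y h z hz hPz)
        · exact absurd (List.mem_singleton.mpr h) hys
      have hlen_add : (PySem.Set.add seen x).length = seen.length + 1 := by
        rw [PySem.Set.add_of_not_mem htr.2, List.length_append, List.length_singleton]
      have hfuel1 : 5 * (R.toNat * C.toNat - (PySem.Set.add seen x).length)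
          + [x].length ≤ fuel := by
        rw [hlen_add]
        simp only [List.length_singleton]
        omega
      set res := solveDfs1 fuel (pvSet g x.1 x.2 0, [x], PySem.Set.add seen x) with hres
      have hresf : solveDfs1 fuel (pvSet g x.1 x.2 0, [x], PySem.Set.add seen x)
          = (res.1, res.2) := rfl
      obtain ⟨f1, f2, f3, f4, f5, f6⟩ :=
        pvFlood1 R C ν hR hC hv fuel _ _ _ hrel1 hnd1 hsP1 hss1 hfront1 hfuel1 res.1 res.2 hresf
      have hmono : ∀ y ∈ seen, y ∈ res.2 := by
        intro y hy
        exact f4 y ((PySem.Set.mem_add _ _ _).mpr (Or.inl hy))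
      have hxres : x ∈ res.2 := f4 x ((PySem.Set.mem_add _ _ _).mpr (Or.inr rfl))
      have hrem1 : ∀ y ∈ res.2, pvRem R C ν y := by
        intro y hy
        rcases f5 y hy with h | ⟨s, hs, hreach⟩
        · rcases (PySem.Set.mem_add _ _ _).mp h with h' | h'
          · exact hrem y h'
          · rw [h']; exact ⟨x, hx2, pvReach.refl x hxP⟩
        · rw [List.mem_singleton.mp hs] at hreach
          exact ⟨x, hx2, hreach⟩
      obtain ⟨g1, g2, g3, g4, g5, g6, g7⟩ :=
        ih (fun y hy => hL y (List.mem_cons_of_mem _ hy)) res.1 res.2 f1 f2 f3 f6 hrem1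
          g' seen' heq
      exact ⟨g1, g2, g3, g4, g5, fun y hy => g6 y (hmono y hy),
        fun y hy hy2 => by
          rcases List.mem_cons.mp hy with h | h
          · rw [h]; exact g6 x hxres
          · exact g7 y h hy2⟩
    · have hstep : pvScan1Step fuel (g, seen) x = (g, seen) := by
        simp only [pvScan1Step]; rw [if_neg htr]
      rw [hstep] at heq
      obtain ⟨g1, g2, g3, g4, g5, g6, g7⟩ :=
        ih (fun y hy => hL y (List.mem_cons_of_mem _ hy)) g seen hrel hnd hsP hsat hrem
          g' seen' heq
      refine ⟨g1, g2, g3, g4, g5, g6, ?_⟩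
      intro y hy hy2
      rcases List.mem_cons.mp hy with h | h
      · subst h
        have hyseen : y ∈ seen := by
          by_cases hs : y ∈ seen
          · exact hs
          · exfalso
            exact htr ⟨by rw [hgx, if_neg hs]; exact hy2, hs⟩
        exact g6 y hyseen
      · exact g7 y h hy2

def pvScan2Step (new1 : List (List Int)) (fuel : Nat)
    (st : Int × PySem.Set (Int × Int)) (x : Int × Int) : Int × PySem.Set (Int × Int) :=
  if pvGet new1 x.1 x.2 = 1 ∧ x ∉ st.2 then
    (st.1 + 1, solveDfs2 new1 fuel [x] st.2)
  else st

def pvScanBStep (grid : List (List Int)) (R C : Int) (fuel : Nat)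
    (st : PySem.Set (Int × Int) × Int) (x : Int × Int) : PySem.Set (Int × Int) × Int :=
  if pvGet grid x.1 x.2 ≠ 0 ∧ x ∉ st.1 then
    let res := solveAltDfs grid R C fuel true [x] (PySem.Set.add st.1 x)
    if res.1 then (res.2, st.2 + 1) else (res.2, st.2)
  else st

theorem pvScanPair (R C : Int) (ν : Int × Int → Int) (hR : 0 ≤ R) (hC : 0 ≤ C)
    (hv : ∀ x, ν x = 0 ∨ ν x = 1 ∨ ν x = 2)
    {new1 grid : List (List Int)} (hsh1 : pvShape R C new1)
    (hnew1a : ∀ x, pvIn R C x → pvRem R C ν x → pvGet new1 x.1 x.2 = 0)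
    (hnew1b : ∀ x, pvIn R C x → ¬ pvRem R C ν x → pvGet new1 x.1 x.2 = ν x)
    (hg0 : ∀ x, pvIn R C x → (pvGet grid x.1 x.2 ≠ 0 ↔ ν x ≠ 0))
    (hg1 : ∀ x, pvIn R C x → (pvGet grid x.1 x.2 = 1 ↔ ν x = 2))
    (fuelA fuelB : Nat) (hfA : 5 * (R.toNat * C.toNat) + 1 ≤ fuelA)
    (hfB : 5 * (R.toNat * C.toNat) + 1 ≤ fuelB) :
    ∀ (L : List (Int × Int)), (∀ x ∈ L, pvIn R C x) → L.Nodup →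
    ∀ (ansA : Int) (sA : PySem.Set (Int × Int)) (sB : PySem.Set (Int × Int)) (ansB : Int),
    sA.Nodup → sB.Nodup →
    (∀ x ∈ sB, pvP R C ν x) → pvSat (pvP R C ν) sB →
    (∀ x ∈ sA, pvP2 R C ν x) → pvSat (pvP2 R C ν) sA →
    (∀ x, x ∈ sA ↔ (x ∈ sB ∧ ¬ pvRem R C ν x ∧ pvBig R C ν x)) →
    (∀ x ∈ L, x ∈ sB → pvBig R C ν x) →
    ∀ ansA' sA' sB' ansB',
    L.foldl (pvScan2Step new1 fuelA) (ansA, sA) = (ansA', sA') →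
    L.foldl (pvScanBStep grid R C fuelB) (sB, ansB) = (sB', ansB') →
    ansA' - ansA = ansB' - ansB := by
  have hQ1 : ∀ y, pvIn R C y → (pvGet new1 y.1 y.2 = 1 ↔ pvP2 R C ν y) := by
    intro y hy
    by_cases hRem : pvRem R C ν y
    · rw [hnew1a y hy hRem]
      constructor
      · intro h; omega
      · intro h; exact absurd hRem h.2
    · rw [hnew1b y hy hRem]
      constructor
      · intro h
        exact ⟨⟨hy, by omega⟩, hRem⟩
      · rintro ⟨⟨_, hν0⟩, _⟩
        rcases hv y with h | h | h
        · omega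
        · omega
        · exact absurd ⟨y, h, pvReach.refl y ⟨hy, by omega⟩⟩ hRem
  have hQin : ∀ y, pvP2 R C ν y → pvIn R C y := fun y hy => hy.1.1
  intro L
  induction L with
  | nil =>
    intro _ _ ansA sA sB ansB _ _ _ _ _ _ _ _ ansA' sA' sB' ansB' heqA heqB
    obtain ⟨rfl, rfl⟩ : ansA = ansA' ∧ sA = sA' := by simpa [Prod.ext_iff] using heqA
    obtain ⟨rfl, rfl⟩ : sB = sB' ∧ ansB = ansB' := by simpa [Prod.ext_iff] using heqB
    omega
  | cons x L ih =>
    intro hL hLnd ansA sA sB ansB hndA hndB hsBP hsatB hsAP hsatA hcpl hLB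
    intro ansA' sA' sB' ansB' heqA heqB
    rw [List.foldl_cons] at heqA heqB
    have hxin : pvIn R C x := hL x List.mem_cons_self
    have hxrest : x ∉ L := (List.nodup_cons.mp hLnd).1
    have hLtail : ∀ y ∈ L, pvIn R C y := fun y hy => hL y (List.mem_cons_of_mem _ hy)
    have hLndtail : L.Nodup := (List.nodup_cons.mp hLnd).2
    by_cases hB : pvGet grid x.1 x.2 ≠ 0 ∧ x ∉ sB
    · -- B triggers: flood the whole nonzero component of x
      have hνx : ν x ≠ 0 := (hg0 x hxin).mp hB.1
      have hxP : pvP R C ν x := ⟨hxin, hνx⟩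
      set res := solveAltDfs grid R C fuelB true [x] (PySem.Set.add sB x) with hresdef
      have hresf : solveAltDfs grid R C fuelB true [x] (PySem.Set.add sB x)
          = (res.1, res.2) := rfl
      have hnd1 : (PySem.Set.add sB x).Nodup := PySem.Set.nodup_add _ _ hndB
      have hsP1 : ∀ y ∈ PySem.Set.add sB x, pvP R C ν y := by
        intro y hy
        rcases (PySem.Set.mem_add _ _ _).mp hy with h | h
        · exact hsBP y h
        · rw [h]; exact hxP
      have hss1 : ∀ y ∈ [x], y ∈ PySem.Set.add sB x := by
        intro y hy
        rw [List.mem_singleton.mp hy, PySem.Set.mem_add]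
        exact Or.inr rfl
      have hO1 : ∀ y ∈ sB, y ∈ PySem.Set.add sB x :=
        fun y hy => (PySem.Set.mem_add _ _ _).mpr (Or.inl hy)
      have hsO1 : ∀ y ∈ [x], y ∉ sB := by
        intro y hy
        rw [List.mem_singleton.mp hy]
        exact hB.2
      have hpure0 : (true = true) ↔ (true = true ∧
          ∀ y ∈ PySem.Set.add sB x, y ∉ sB → y ∉ [x] → ν y ≠ 2) := by
        simp only [true_iff, true_and, iff_true]
        intro y hy hy1 hy2
        rcases (PySem.Set.mem_add _ _ _).mp hy with h | h
        · exact absurd h hy1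
        · exact absurd (List.mem_singleton.mpr h) hy2
      have hfront1 : ∀ y ∈ PySem.Set.add sB x, y ∉ [x] →
          ∀ z, pvAdj y z → pvP R C ν z → z ∈ PySem.Set.add sB x := by
        intro y hy hys z hz hPz
        rcases (PySem.Set.mem_add _ _ _).mp hy with h | h
        · rw [PySem.Set.mem_add]
          exact Or.inl (hsatB y h z hz hPz)
        · exact absurd (List.mem_singleton.mpr h) hys
      have hlen_add : (PySem.Set.add sB x).length = sB.length + 1 := by
        rw [PySem.Set.add_of_not_mem hB.2, List.length_append, List.length_singleton]
      have hfuel1 : 5 * (R.toNat * C.toNat - (PySem.Set.add sB x).length)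
          + [x].length ≤ fuelB := by
        rw [hlen_add]
        simp only [List.length_singleton]
        omega
      obtain ⟨fB1, fB2, fB3, fB4, fB5, fB6⟩ :=
        pvFloodB R C ν hR hC hg0 hg1 sB true fuelB true [x] (PySem.Set.add sB x)
          hnd1 (List.nodup_singleton x) hsP1 hss1 hO1 hsO1 hpure0 hfront1 hfuel1
          res.1 res.2 hresf
      have hxres : x ∈ res.2 := fB3 x ((PySem.Set.mem_add _ _ _).mpr (Or.inr rfl))
      -- the new seen set of B is sB plus the component of x
      have hsetB : ∀ y, y ∈ res.2 ↔ (y ∈ sB ∨ pvReach (pvP R C ν) x y) := by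
        intro y
        constructor
        · intro hy
          rcases fB4 y hy with h | ⟨s, hs, hreach⟩
          · rcases (PySem.Set.mem_add _ _ _).mp h with h' | h'
            · exact Or.inl h'
            · rw [h']; exact Or.inr (pvReach.refl x hxP)
          · rw [List.mem_singleton.mp hs] at hreach
            exact Or.inr hreach
        · intro hy
          rcases hy with h | h
          · exact fB3 y ((PySem.Set.mem_add _ _ _).mpr (Or.inl h))
          · exact pvSat_reach fB5 hxres h
      have hcompB : ∀ y, pvReach (pvP R C ν) x y → y ∉ sB :=
        fun y h => pvSat_not_reach hsatB hB.2 h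
      -- B's purity flag is exactly purity of the component
      have hpureiff : res.1 = true ↔ (∀ y, pvReach (pvP R C ν) x y → ν y ≠ 2) := by
        rw [fB6]
        simp only [true_and]
        constructor
        · intro h y hy
          exact h y ((hsetB y).mpr (Or.inr hy)) (hcompB y hy)
        · intro h y hy hy1
          rcases (hsetB y).mp hy with h' | h'
          · exact absurd h' hy1
          · exact h y h'
      by_cases hpure : ∀ y, pvReach (pvP R C ν) x y → ν y ≠ 2
      · -- pure component: both sides count it
        have hres1 : res.1 = true := hpureiff.mpr hpure
        have hstepB : pvScanBStep grid R C fuelB (sB, ansB) x = (res.2, ansB + 1) := by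
          unfold pvScanBStep
          rw [if_pos hB]
          show (if res.1 then (res.2, ansB + 1) else (res.2, ansB)) = _
          rw [if_pos hres1]
        rw [hstepB] at heqB
        -- A also triggers
        have hnRem : ¬ pvRem R C ν x := by
          rintro ⟨s, hs2, hsx⟩
          exact hpure s (pvReach_symm hsx) hs2
        have hxP2 : pvP2 R C ν x := ⟨hxP, hnRem⟩
        have hxnA : x ∉ sA := fun hx => hB.2 ((hcpl x).mp hx).1
        have hA : pvGet new1 x.1 x.2 = 1 ∧ x ∉ sA := ⟨(hQ1 x hxin).mpr hxP2, hxnA⟩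
        set resA := solveDfs2 new1 fuelA [x] sA with hresAdef
        have hresAf : solveDfs2 new1 fuelA [x] sA = resA := rfl
        have hstepA : pvScan2Step new1 fuelA (ansA, sA) x = (ansA + 1, resA) := by
          simp only [pvScan2Step]
          rw [if_pos hA]
        rw [hstepA] at heqA
        have hfuelA1 : 5 * (R.toNat * C.toNat - sA.length) + [x].length ≤ fuelA := by
          simp only [List.length_singleton]
          omega
        obtain ⟨fA1, fA2, fA3, fA4, fA5, fA6, fA7⟩ :=
          pvFlood2 R C (pvP2 R C ν) hR hC hsh1 hQ1 hQin fuelA [x] sA hndA hsAP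
            (by intro y hy; rw [List.mem_singleton.mp hy]; exact hxP2)
            (fun y hy hys z hz hQz => hsatA y hy z hz hQz) hfuelA1 resA hresAf
        have hobA : ∀ z, pvAdj x z → pvP2 R C ν z → z ∈ resA :=
          fun z hz hQz => fA6 x List.mem_cons_self z hz hQz
        have hcoverA : ∀ y, pvReach (pvP2 R C ν) x y → y = x ∨ y ∈ resA :=
          pvCompCover (fun z hz y hy hQy => fA5 z hz y hy hQy) hobA
        -- characterization of membership in resA
        have hsetA : ∀ y, y ∈ resA → (y ∈ sA ∨ pvReach (pvP R C ν) x y) := by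
          intro y hy
          rcases fA4 y hy with h | ⟨s, hs, hreach⟩
          · exact Or.inl h
          · rw [List.mem_singleton.mp hs] at hreach
            exact Or.inr (pvReach_of_P2 hreach)
        have hbigiff : x ∈ resA ↔ pvBig R C ν x := by
          constructor
          · intro hx
            rcases fA7 x hx with h | ⟨z, hz, hQz⟩
            · rcases (hcpl x).mp h with ⟨h1, _⟩
              exact absurd h1 hB.2
            · exact ⟨z, pvAdj_ne hz,
                pvReach.tail (pvReach.refl x hxP) (pvAdj_symm hz) hQz.1⟩
          · rintro ⟨z, hzx, hreach⟩
            have hreach2 := pvReach_P2_of_pure hnRem hreach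
            rcases hcoverA z hreach2 with h | h
            · exact absurd h hzx
            · exact pvSat_reach fA5 h (pvReach_symm hreach2)
        -- IH invariants after the pure component is flooded on both sides
        have hcpl' : ∀ y, y ∈ resA ↔ (y ∈ res.2 ∧ ¬ pvRem R C ν y ∧ pvBig R C ν y) := by
          intro y
          constructor
          · intro hy
            rcases hsetA y hy with h | h
            · obtain ⟨h1, h2, h3⟩ := (hcpl y).mp h
              exact ⟨(hsetB y).mpr (Or.inl h1), h2, h3⟩
            · refine ⟨(hsetB y).mpr (Or.inr h), ?_, ?_⟩
              · intro hRy
                exact hnRem (pvRem_of_reach hRy (pvReach_symm h))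
              · by_cases hyx : y = x
                · subst hyx
                  exact hbigiff.mp hy
                · exact ⟨x, fun he => hyx he.symm, pvReach_symm h⟩
          · rintro ⟨hyB', hnr, hbg⟩
            rcases (hsetB y).mp hyB' with h | h
            · exact fA3 y ((hcpl y).mpr ⟨h, hnr, hbg⟩)
            · have hreach2 := pvReach_P2_of_pure hnRem h
              rcases hcoverA y hreach2 with h' | h'
              · subst h'
                obtain ⟨z, hzx, hz⟩ := hbg
                have hz2 := pvReach_P2_of_pure hnRem hz
                rcases hcoverA z hz2 with h'' | h''
                · exact absurd h'' hzx
                · exact pvSat_reach fA5 h'' (pvReach_symm hz2)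
              · exact h'
        have hLB' : ∀ y ∈ L, y ∈ res.2 → pvBig R C ν y := by
          intro y hy hyB'
          rcases (hsetB y).mp hyB' with h | h
          · exact hLB y (List.mem_cons_of_mem _ hy) h
          · have hyx : y ≠ x := fun he => hxrest (he ▸ hy)
            exact ⟨x, fun he => hyx he.symm, pvReach_symm h⟩
        have := ih hLtail hLndtail (ansA + 1) resA res.2 (ansB + 1) fA1 fB1 fB2 fB5 fA2
          (fun z hz y hy hQy => fA5 z hz y hy hQy) hcpl' hLB' ansA' sA' sB' ansB' heqA heqB
        omega
      ·
        -- impure component: B floods it without counting, A skips the cell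
        push_neg at hpure
        obtain ⟨z, hz1, hz2⟩ := hpure
        have hRemx : pvRem R C ν x := ⟨z, hz2, pvReach_symm hz1⟩
        have hres1 : res.1 = false := by
          rcases Bool.eq_false_or_eq_true res.1 with h | h
          · exact absurd hz2 (hpureiff.mp h z hz1)
          · exact h
        have hstepB : pvScanBStep grid R C fuelB (sB, ansB) x = (res.2, ansB) := by
          unfold pvScanBStep
          rw [if_pos hB]
          show (if res.1 then (res.2, ansB + 1) else (res.2, ansB)) = _
          rw [if_neg (by rw [hres1]; exact Bool.false_ne_true)]
        rw [hstepB] at heqB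
        have hstepA : pvScan2Step new1 fuelA (ansA, sA) x = (ansA, sA) := by
          unfold pvScan2Step
          rw [if_neg]
          rintro ⟨h1, h2⟩
          exact ((hQ1 x hxin).mp h1).2 hRemx
        rw [hstepA] at heqA
        have hcpl' : ∀ y, y ∈ sA ↔ (y ∈ res.2 ∧ ¬ pvRem R C ν y ∧ pvBig R C ν y) := by
          intro y
          constructor
          · intro hy
            obtain ⟨h1, h2, h3⟩ := (hcpl y).mp hy
            exact ⟨(hsetB y).mpr (Or.inl h1), h2, h3⟩
          · rintro ⟨hyB', hnr, hbg⟩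
            rcases (hsetB y).mp hyB' with h | h
            · exact (hcpl y).mpr ⟨h, hnr, hbg⟩
            · exact absurd (pvRem_of_reach hRemx h) hnr
        have hLB' : ∀ y ∈ L, y ∈ res.2 → pvBig R C ν y := by
          intro y hy hyB'
          rcases (hsetB y).mp hyB' with h | h
          · exact hLB y (List.mem_cons_of_mem _ hy) h
          · have hyx : y ≠ x := fun he => hxrest (he ▸ hy)
            exact ⟨x, fun he => hyx he.symm, pvReach_symm h⟩
        exact ih hLtail hLndtail ansA sA res.2 ansB hndA fB1 fB2 fB5 hsAP hsatA
          hcpl' hLB' ansA' sA' sB' ansB' heqA heqB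
    · -- B does not trigger here, and then neither does A
      have hstepB : pvScanBStep grid R C fuelB (sB, ansB) x = (sB, ansB) := by
        unfold pvScanBStep
        rw [if_neg hB]
      rw [hstepB] at heqB
      have hstepA : pvScan2Step new1 fuelA (ansA, sA) x = (ansA, sA) := by
        unfold pvScan2Step
        rw [if_neg]
        rintro ⟨h1, h2⟩
        have hxP2 : pvP2 R C ν x := (hQ1 x hxin).mp h1
        have hν : ν x ≠ 0 := hxP2.1.2
        have hxsB : x ∈ sB := by
          by_cases h : x ∈ sB
          · exact h
          · exact absurd ⟨(hg0 x hxin).mpr hν, h⟩ hB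
        exact h2 ((hcpl x).mpr ⟨hxsB, hxP2.2, hLB x List.mem_cons_self hxsB⟩)
      rw [hstepA] at heqA
      exact ih hLtail hLndtail ansA sA sB ansB hndA hndB hsBP hsatB hsAP hsatA
        hcpl (fun y hy hyB => hLB y (List.mem_cons_of_mem _ hy) hyB) ansA' sA' sB' ansB'
        heqA heqB



-- ---- assembly: name the stages of both ports ----
def pvR (a b : List (List Int)) : Int := min (PySem.List.len a) (PySem.List.len b)
def pvC (a b : List (List Int)) : Int :=
  min (PySem.List.len (PySem.List.pyGetD a 0 [])) (PySem.List.len (PySem.List.pyGetD b 0 []))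
def pvNew0 (a b : List (List Int)) : List (List Int) :=
  (PySem.List.pyRange 0 (pvR a b) 1).map
    (fun _ => (PySem.List.pyRange 0 (pvC a b) 1).map (fun _ => (0 : Int)))
def pvGridA (a b : List (List Int)) : List (List Int) :=
  (PySem.List.pyRange 0 (pvR a b) 1).foldl (fun g r =>
    (PySem.List.pyRange 0 (pvC a b) 1).foldl (fun g c =>
      if pvGet a r c = 1 ∧ pvGet b r c = 1 then pvSet g r c 1
      else if Bool.xor (decide (pvGet a r c = 1)) (decide (pvGet b r c = 1)) then
        pvSet g r c 2
      else g) g) (pvNew0 a b)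
def pvFuel (a b : List (List Int)) : Nat := 5 * (pvR a b * pvC a b).toNat + 8
def pvSt1 (a b : List (List Int)) : List (List Int) × PySem.Set (Int × Int) :=
  (PySem.List.pyRange 0 (PySem.List.len (pvGridA a b)) 1).foldl
    (fun (st : List (List Int) × PySem.Set (Int × Int)) r =>
      (PySem.List.pyRange 0 (PySem.List.len (PySem.List.pyGetD (pvGridA a b) 0 [])) 1).foldl
        (fun st c =>
          if pvGet st.1 r c = 2 ∧ (r, c) ∉ st.2 then
            solveDfs1 (pvFuel a b) (pvSet st.1 r c 0, [(r, c)], PySem.Set.add st.2 (r, c))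
          else st) st) (pvGridA a b, PySem.Set.empty)
def pvSt2 (a b : List (List Int)) : Int × PySem.Set (Int × Int) :=
  (PySem.List.pyRange 0 (PySem.List.len (pvSt1 a b).1) 1).foldl
    (fun (st : Int × PySem.Set (Int × Int)) r =>
      (PySem.List.pyRange 0 (PySem.List.len (PySem.List.pyGetD (pvSt1 a b).1 0 [])) 1).foldl
        (fun st c =>
          if pvGet (pvSt1 a b).1 r c = 1 ∧ (r, c) ∉ st.2 then
            (st.1 + 1, solveDfs2 (pvSt1 a b).1 (pvFuel a b) [(r, c)] st.2)
          else st) st) ((0 : Int), PySem.Set.empty)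
def pvGridB (a b : List (List Int)) : List (List Int) :=
  (PySem.List.pyRange 0 (pvR a b) 1).map (fun r =>
    (PySem.List.pyRange 0 (pvC a b) 1).map (fun c =>
      (if pvGet a r c = 1 then (1 : Int) else 0) + (if pvGet b r c = 1 then 1 else 0)))
def pvStB (a b : List (List Int)) : PySem.Set (Int × Int) × Int :=
  (PySem.List.pyRange 0 (pvR a b) 1).foldl
    (fun (st : PySem.Set (Int × Int) × Int) r =>
      (PySem.List.pyRange 0 (pvC a b) 1).foldl (fun st c =>
        if pvGet (pvGridB a b) r c ≠ 0 ∧ (r, c) ∉ st.1 then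
          let res := solveAltDfs (pvGridB a b) (pvR a b) (pvC a b) (pvFuel a b) true
            [(r, c)] (PySem.Set.add st.1 (r, c))
          if res.1 then (res.2, st.2 + 1) else (res.2, st.2)
        else st) st) (PySem.Set.empty, (0 : Int))

theorem solveA_eq (a b : List (List Int)) : solve a b = (pvSt2 a b).1 := rfl
theorem solveB_eq (a b : List (List Int)) : solve_alt a b = (pvStB a b).2 := rfl

theorem gridA_flat (a b : List (List Int)) :
    pvGridA a b = (pvCells (pvR a b) (pvC a b)).foldl (pvW a b) (pvNew0 a b) :=
  pvFoldl_nested (PySem.List.pyRange 0 (pvR a b) 1) (PySem.List.pyRange 0 (pvC a b) 1)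
    (pvW a b) (pvNew0 a b)

theorem st1_flat (a b : List (List Int))
    (h1 : PySem.List.len (pvGridA a b) = pvR a b)
    (h2 : PySem.List.len (PySem.List.pyGetD (pvGridA a b) 0 []) = pvC a b) :
    pvSt1 a b = (pvCells (pvR a b) (pvC a b)).foldl (pvScan1Step (pvFuel a b))
      (pvGridA a b, PySem.Set.empty) := by
  unfold pvSt1
  rw [h1, h2]
  exact pvFoldl_nested _ _ (pvScan1Step (pvFuel a b)) _

theorem st2_flat (a b : List (List Int))
    (h1 : PySem.List.len (pvSt1 a b).1 = pvR a b)
    (h2 : PySem.List.len (PySem.List.pyGetD (pvSt1 a b).1 0 []) = pvC a b) :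
    pvSt2 a b = (pvCells (pvR a b) (pvC a b)).foldl
      (pvScan2Step (pvSt1 a b).1 (pvFuel a b)) ((0 : Int), PySem.Set.empty) := by
  unfold pvSt2
  rw [h1, h2]
  exact pvFoldl_nested _ _ (pvScan2Step (pvSt1 a b).1 (pvFuel a b)) _

theorem stB_flat (a b : List (List Int)) :
    pvStB a b = (pvCells (pvR a b) (pvC a b)).foldl
      (pvScanBStep (pvGridB a b) (pvR a b) (pvC a b) (pvFuel a b))
      (PySem.Set.empty, (0 : Int)) :=
  pvFoldl_nested _ _ (pvScanBStep (pvGridB a b) (pvR a b) (pvC a b) (pvFuel a b)) _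

-- ===== VERDICT (by name: the statement is the Claim_ definition above) =====
theorem solve_spec : Claim_equal_solve := by
  intro a b _hdom hpre
  show solve a b = solve_alt a b
  obtain ⟨ha, hb, _hra, _hrb⟩ := hpre
  set R : Int := pvR a b with hRdef
  set C : Int := pvC a b with hCdef
  set ν : (Int × Int) → Int := pvVal a b with hνdef
  have hR0 : 0 ≤ R := by
    rw [hRdef]
    unfold pvR
    rw [PySem.List.len_eq, PySem.List.len_eq]
    omega
  have hC0 : 0 ≤ C := by
    rw [hCdef]
    unfold pvC
    rw [PySem.List.len_eq, PySem.List.len_eq]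
    omega
  have hR1 : 1 ≤ R := by
    rw [hRdef]
    unfold pvR
    rw [PySem.List.len_eq, PySem.List.len_eq]
    have h1 : 0 < a.length := List.length_pos_iff.mpr ha
    have h2 : 0 < b.length := List.length_pos_iff.mpr hb
    omega
  have hv : ∀ x, ν x = 0 ∨ ν x = 1 ∨ ν x = 2 := by
    intro x
    rw [hνdef]
    unfold pvVal
    split_ifs <;> omega
  have hfuel : 5 * (R.toNat * C.toNat) + 1 ≤ pvFuel a b := by
    unfold pvFuel
    rw [Int.toNat_mul hR0 hC0]
    omega
  -- the built grid of A
  have hsh0 : pvShape R C (pvNew0 a b) := pvShape_mapGrid (fun _ _ => (0 : Int))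
  have hz0 : ∀ x, pvIn R C x → pvGet (pvNew0 a b) x.1 x.2 = 0 :=
    fun x hx => pvGet_mapGrid (fun _ _ => (0 : Int)) hx
  obtain ⟨hshA, hvalA⟩ :=
    pvBuildA a b R C (pvCells R C) (pvNew0 a b) hsh0
      (fun x hx => mem_pvCells.mp hx) (fun x hx _ => hz0 x hx)
  rw [← gridA_flat] at hshA hvalA
  have hvalA' : ∀ x, pvIn R C x → pvGet (pvGridA a b) x.1 x.2 = ν x := by
    intro x hx
    rw [hvalA x hx, if_pos (mem_pvCells.mpr hx)]
  have hlenA : PySem.List.len (pvGridA a b) = R := by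
    rw [PySem.List.len_eq, hshA.1, Int.toNat_of_nonneg hR0]
  have hrowA : PySem.List.len (PySem.List.pyGetD (pvGridA a b) 0 []) = C := by
    have hg0 : pvGridA a b ≠ [] := by
      intro h
      rw [h] at hlenA
      simp [PySem.List.len] at hlenA
      omega
    obtain ⟨r, t, hrt⟩ := List.exists_cons_of_ne_nil hg0
    rw [PySem.List.pyGetD_zero, hrt]
    simp only [List.getD_cons_zero]
    rw [PySem.List.len_eq, hshA.2 r (by rw [hrt]; exact List.mem_cons_self),
      Int.toNat_of_nonneg hC0]
  -- phase 1 of A removes exactly the regions reachable from a XOR-cell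
  set res1 := (pvCells R C).foldl (pvScan1Step (pvFuel a b)) (pvGridA a b, PySem.Set.empty)
    with hres1def
  have hres1f : (pvCells R C).foldl (pvScan1Step (pvFuel a b)) (pvGridA a b, PySem.Set.empty)
      = (res1.1, res1.2) := rfl
  have hempty : ∀ y : Int × Int, y ∉ (PySem.Set.empty : PySem.Set (Int × Int)) := by
    intro y hy
    simp [PySem.Set.empty] at hy
  obtain ⟨G1, G2, G3, G4, G5, G6, G7⟩ :=
    pvScan1 R C ν hR0 hC0 hv (pvFuel a b) hfuel (pvCells R C)
      (fun x hx => mem_pvCells.mp hx) (pvGridA a b) PySem.Set.empty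
      ⟨hshA, fun x hx => by rw [hvalA' x hx, if_neg (hempty x)]⟩
      List.nodup_nil (fun x hx => absurd hx (hempty x))
      (fun x hx => absurd hx (hempty x)) (fun x hx => absurd hx (hempty x))
      res1.1 res1.2 hres1f
  have hRemIff : ∀ x, x ∈ res1.2 ↔ pvRem R C ν x := by
    intro x
    constructor
    · exact G5 x
    · rintro ⟨s, hs2, hreach⟩
      have hsP : pvP R C ν s := pvReach_src hreach
      have hs1 : s ∈ res1.2 := G7 s (mem_pvCells.mpr hsP.1) hs2
      exact pvSat_reach G4 hs1 hreach
  have hst1 : pvSt1 a b = res1 := st1_flat a b hlenA hrowA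
  have hnew1a : ∀ x, pvIn R C x → pvRem R C ν x → pvGet res1.1 x.1 x.2 = 0 := by
    intro x hx hrem
    rw [G1.2 x hx, if_pos ((hRemIff x).mpr hrem)]
  have hnew1b : ∀ x, pvIn R C x → ¬ pvRem R C ν x → pvGet res1.1 x.1 x.2 = ν x := by
    intro x hx hrem
    rw [G1.2 x hx, if_neg (fun h => hrem ((hRemIff x).mp h))]
  have hlen1 : PySem.List.len (pvSt1 a b).1 = R := by
    rw [hst1, PySem.List.len_eq, G1.1.1, Int.toNat_of_nonneg hR0]
  have hrow1 : PySem.List.len (PySem.List.pyGetD (pvSt1 a b).1 0 []) = C := by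
    rw [hst1]
    have hg0 : res1.1 ≠ [] := by
      intro h
      have := G1.1.1
      rw [h] at this
      simp at this
      omega
    obtain ⟨r, t, hrt⟩ := List.exists_cons_of_ne_nil hg0
    rw [PySem.List.pyGetD_zero, hrt]
    simp only [List.getD_cons_zero]
    rw [PySem.List.len_eq, G1.1.2 r (by rw [hrt]; exact List.mem_cons_self),
      Int.toNat_of_nonneg hC0]
  -- B's grid encodes the same values
  have hgB0 : ∀ x, pvIn R C x → (pvGet (pvGridB a b) x.1 x.2 ≠ 0 ↔ ν x ≠ 0) := by
    intro x hx
    have he : pvGet (pvGridB a b) x.1 x.2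
        = (if ν x = 1 then 2 else if ν x = 2 then 1 else 0) := by
      have h1 : pvGet (pvGridB a b) x.1 x.2
          = (if pvGet a x.1 x.2 = 1 then (1 : Int) else 0)
            + (if pvGet b x.1 x.2 = 1 then 1 else 0) :=
        pvGet_mapGrid (fun r c => (if pvGet a r c = 1 then (1 : Int) else 0)
          + (if pvGet b r c = 1 then 1 else 0)) hx
      rw [h1, pvEncB]
    rw [he]
    rcases hv x with h | h | h <;> rw [h] <;> norm_num
  have hgB1 : ∀ x, pvIn R C x → (pvGet (pvGridB a b) x.1 x.2 = 1 ↔ ν x = 2) := by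
    intro x hx
    have he : pvGet (pvGridB a b) x.1 x.2
        = (if ν x = 1 then 2 else if ν x = 2 then 1 else 0) := by
      have h1 : pvGet (pvGridB a b) x.1 x.2
          = (if pvGet a x.1 x.2 = 1 then (1 : Int) else 0)
            + (if pvGet b x.1 x.2 = 1 then 1 else 0) :=
        pvGet_mapGrid (fun r c => (if pvGet a r c = 1 then (1 : Int) else 0)
          + (if pvGet b r c = 1 then 1 else 0)) hx
      rw [h1, pvEncB]
    rw [he]
    rcases hv x with h | h | h <;> rw [h] <;> norm_num
  -- the paired scan
  set res2 := (pvCells R C).foldl (pvScan2Step (pvSt1 a b).1 (pvFuel a b))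
    ((0 : Int), PySem.Set.empty) with hres2def
  have hres2f : (pvCells R C).foldl (pvScan2Step (pvSt1 a b).1 (pvFuel a b))
      ((0 : Int), PySem.Set.empty) = (res2.1, res2.2) := rfl
  set resB := (pvCells R C).foldl
    (pvScanBStep (pvGridB a b) R C (pvFuel a b)) (PySem.Set.empty, (0 : Int)) with hresBdef
  have hresBf : (pvCells R C).foldl (pvScanBStep (pvGridB a b) R C (pvFuel a b))
      (PySem.Set.empty, (0 : Int)) = (resB.1, resB.2) := rfl
  have hsh1 : pvShape R C (pvSt1 a b).1 := by rw [hst1]; exact G1.1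
  have hnew1a' : ∀ x, pvIn R C x → pvRem R C ν x → pvGet (pvSt1 a b).1 x.1 x.2 = 0 := by
    rw [hst1]; exact hnew1a
  have hnew1b' : ∀ x, pvIn R C x → ¬ pvRem R C ν x → pvGet (pvSt1 a b).1 x.1 x.2 = ν x := by
    rw [hst1]; exact hnew1b
  have hpair :=
    pvScanPair R C ν hR0 hC0 hv hsh1 hnew1a' hnew1b' hgB0 hgB1
      (pvFuel a b) (pvFuel a b) hfuel hfuel (pvCells R C)
      (fun x hx => mem_pvCells.mp hx) nodup_pvCells
      0 PySem.Set.empty PySem.Set.empty 0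
      List.nodup_nil List.nodup_nil
      (fun x hx => absurd hx (hempty x)) (fun x hx => absurd hx (hempty x))
      (fun x hx => absurd hx (hempty x)) (fun x hx => absurd hx (hempty x))
      (fun x => ⟨fun hx => absurd hx (hempty x), fun ⟨hx, _⟩ => absurd hx (hempty x)⟩)
      (fun x _ hx => absurd hx (hempty x))
      res2.1 res2.2 resB.1 resB.2 hres2f hresBf
  have hA : solve a b = res2.1 := by
    rw [solveA_eq, st2_flat a b hlen1 hrow1]
  have hB : solve_alt a b = resB.2 := by
    rw [solveB_eq, stB_flat]
  rw [hA, hB]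
  omega
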